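-- pv_equiv track=rewrite | github.com/isudox/nerd-algo | python-algo/leetcode/problem_1579.py | max_num_edges_to_remove_2
-- ===== SOURCE A (Python) =====
-- from typing import List
--
-- def max_num_edges_to_remove_2(n: int, edges: List[List[int]]) -> int:
--     def find(uf: List[int], x: int) -> int:
--         if uf[x] != x:
--             uf[x] = find(uf, uf[x])
--         return uf[x]
--
--     def union(uf: List[int], rank: List[int], x: int, y: int) -> int:
--         fx, fy = find(uf, x), find(uf, y)
--         if fx == fy:
--             return 0
--         if rank[fx] < rank[fy]:
--             fx, fy = fy, fx
--         uf[fy] = fx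
--         rank[fx] += rank[fy]
--         return 1
--
--     uf_1, rank_1 = list(range(n + 1)), [1] * (n + 1)
--     uf_2, rank_2 = list(range(n + 1)), [1] * (n + 1)
--     required = 0
--     for t, u, v in edges:
--         if t == 3 and union(uf_1, rank_1, u, v) + union(uf_2, rank_2, u, v) > 0:
--             required += 1
--     for t, u, v in edges:
--         if t == 1 and union(uf_1, rank_1, u, v):
--             required += 1
--         if t == 2 and union(uf_2, rank_2, u, v):
--             required += 1
--     if required < n - 1:
--         return -1
--     for i in range(1, n + 1):
--         if find(uf_1, i) != find(uf_1, 1) or find(uf_2, i) != find(uf_2, 1):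
--             return -1
--     return len(edges) - required
-- ===== SOURCE B (Python) =====
-- def max_num_edges_to_remove_2(n, edges):
--     # Build one adjacency list per graph: g1 (Alice: types 1,3), g2 (Bob: types 2,3),
--     # g3 (shared type-3 edges only), then count connected components of nodes 1..n
--     # with an iterative DFS.  Answer = len(edges) - (n + c3 - c1 - c2), where
--     # n + c3 - c1 - c2 is the number of edges any spanning structure must keep.
--     g1 = [[] for _ in range(n + 1)]
--     g2 = [[] for _ in range(n + 1)]
--     g3 = [[] for _ in range(n + 1)]
--     for e in edges:
--         t, u, v = e[0], e[1], e[2]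
--         if t == 3:
--             for g in (g1, g2, g3):
--                 g[u].append(v)
--                 g[v].append(u)
--         elif t == 1:
--             g1[u].append(v)
--             g1[v].append(u)
--         elif t == 2:
--             g2[u].append(v)
--             g2[v].append(u)
--
--     def components(g):
--         visited = [False] * (n + 1)
--         comps = 0
--         for s in range(1, n + 1):
--             if not visited[s]:
--                 comps += 1
--                 visited[s] = True
--                 stack = [s]
--                 while stack:
--                     x = stack.pop()
--                     for y in g[x]:
--                         if not visited[y]:
--                             visited[y] = True
--                             stack.append(y)
--         return comps
--
--     c1 = components(g1)
--     c2 = components(g2)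
--     if c1 > 1 or c2 > 1:
--         return -1
--     c3 = components(g3)
--     return len(edges) - (n + c3 - c1 - c2)
-- ===== Notes on version B (the rewrite author's own statement) =====
-- stated objective: alternative
-- what changed: B abandons union-find entirely: it builds three adjacency lists (Alice, Bob, shared), counts connected components of each graph over nodes 1..n with an iterative stack DFS, and gets the answer in closed form as len(edges) - (n + c3 - c1 - c2), returning -1 when c1 > 1 or c2 > 1; A instead runs two staged union-find passes with rank arrays, a running success counter and a final node-by-node find verification loop.
-- outside the precondition, e.g. on max_num_edges_to_remove_2(2, [[3, 1, 0], [3, 2, 0]]): A returns 0, B returns 1; on max_num_edges_to_remove_2(-1, []): A returns 0, B returns 1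
import Mathlib
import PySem

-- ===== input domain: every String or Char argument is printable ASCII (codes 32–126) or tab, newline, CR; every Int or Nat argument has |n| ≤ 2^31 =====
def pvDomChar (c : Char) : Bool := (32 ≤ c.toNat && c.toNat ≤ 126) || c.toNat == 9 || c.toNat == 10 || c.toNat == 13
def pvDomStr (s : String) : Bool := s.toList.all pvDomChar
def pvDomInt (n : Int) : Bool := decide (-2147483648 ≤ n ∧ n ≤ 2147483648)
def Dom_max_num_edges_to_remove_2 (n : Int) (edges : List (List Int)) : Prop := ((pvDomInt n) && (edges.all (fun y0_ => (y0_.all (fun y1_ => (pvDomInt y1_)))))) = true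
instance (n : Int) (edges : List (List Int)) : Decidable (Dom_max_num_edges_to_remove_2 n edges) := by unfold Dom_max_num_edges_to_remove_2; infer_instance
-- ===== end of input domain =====

-- B abandons union-find entirely: it builds per-graph adjacency lists, counts connected
-- components with an iterative DFS and returns the closed form len(edges) - (n + c3 - c1 - c2),
-- deciding disconnectedness by c1 > 1 or c2 > 1; return value only — neither version mutates
-- its arguments.

-- ===== PORT A =====
-- find(uf, x): recursive with path compression; fuel = len(uf) (exhaustion unreachable under Pre_);
-- 'return uf[x]' after 'uf[x] = r' is returned as r (exact for the in-range indices Pre_ admits).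
def findA : Nat → List Int → Int → List Int × Int
  | 0, uf, x => (uf, PySem.List.pyGetD uf x 0)
  | fuel + 1, uf, x =>
    let p := PySem.List.pyGetD uf x 0
    if p ≠ x then
      let r := findA fuel uf p
      (PySem.List.pySetD r.1 x r.2, r.2)
    else (uf, p)

def unionA (uf rank : List Int) (x y : Int) : List Int × List Int × Int :=
  let f1 := findA uf.length uf x
  let f2 := findA f1.1.length f1.1 y
  if f1.2 = f2.2 then (f2.1, rank, 0)
  else
    let pr := if PySem.List.pyGetD rank f1.2 0 < PySem.List.pyGetD rank f2.2 0
              then (f2.2, f1.2) else (f1.2, f2.2)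
    (PySem.List.pySetD f2.1 pr.2 pr.1,
     PySem.List.pySetD rank pr.1
       (PySem.List.pyGetD rank pr.1 0 + PySem.List.pyGetD rank pr.2 0), 1)

-- first loop: 'for t, u, v in edges: if t == 3 and union_1 + union_2 > 0: required += 1'
-- (an edge that is not a 3-element list raises on unpacking in Python; Pre_ excludes it)
def step1A (s : List Int × List Int × List Int × List Int × Int) (e : List Int) :
    List Int × List Int × List Int × List Int × Int :=
  match s, e with
  | (uf1, rank1, uf2, rank2, req), [t, u, v] =>
    if t = 3 then
      let r1 := unionA uf1 rank1 u v
      let r2 := unionA uf2 rank2 u v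
      (r1.1, r1.2.1, r2.1, r2.2.1, if r1.2.2 + r2.2.2 > 0 then req + 1 else req)
    else (uf1, rank1, uf2, rank2, req)
  | s, _ => s

-- second loop: two successive ifs (t == 1, then t == 2), short-circuit 'and'
def step2A (s : List Int × List Int × List Int × List Int × Int) (e : List Int) :
    List Int × List Int × List Int × List Int × Int :=
  match s, e with
  | (uf1, rank1, uf2, rank2, req), [t, u, v] =>
    let s1 :=
      if t = 1 then
        let r1 := unionA uf1 rank1 u v
        (r1.1, r1.2.1, uf2, rank2, if r1.2.2 ≠ 0 then req + 1 else req)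
      else (uf1, rank1, uf2, rank2, req)
    match s1 with
    | (uf1, rank1, uf2, rank2, req) =>
      if t = 2 then
        let r2 := unionA uf2 rank2 u v
        (uf1, rank1, r2.1, r2.2.1, if r2.2.2 ≠ 0 then req + 1 else req)
      else (uf1, rank1, uf2, rank2, req)
  | s, _ => s

-- final loop: 'for i in range(1, n+1): if find(uf_1,i) != find(uf_1,1) or …: return -1' (threading the
-- mutated arrays; 'or' short-circuits exactly as in Python)
def verifyA : List Int → List Int → List Int → Int → Int
  | [], _, _, res => res
  | i :: is, uf1, uf2, res =>
    let a := findA uf1.length uf1 i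
    let b := findA a.1.length a.1 1
    if a.2 ≠ b.2 then -1
    else
      let c := findA uf2.length uf2 i
      let d := findA c.1.length c.1 1
      if c.2 ≠ d.2 then -1
      else verifyA is b.1 d.1 res

def max_num_edges_to_remove_2 (n : Int) (edges : List (List Int)) : Int :=
  let uf1 := PySem.List.pyRange 0 (n + 1) 1
  let rank1 := List.replicate (n + 1).toNat 1
  let uf2 := PySem.List.pyRange 0 (n + 1) 1
  let rank2 := List.replicate (n + 1).toNat 1
  let s1 := edges.foldl step1A (uf1, rank1, uf2, rank2, 0)
  let s2 := edges.foldl step2A s1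
  match s2 with
  | (uf1, _, uf2, _, req) =>
    if req < n - 1 then -1
    else verifyA (PySem.List.pyRange 1 (n + 1) 1) uf1 uf2 (edges.length - req)

-- ===== PORT B =====
-- g[u].append(v)
def appendAdj (g : List (List Int)) (u v : Int) : List (List Int) :=
  PySem.List.pySetD g u (PySem.List.pyGetD g u [] ++ [v])

-- g[u].append(v); g[v].append(u)
def addEdgeB (g : List (List Int)) (u v : Int) : List (List Int) :=
  appendAdj (appendAdj g u v) v u

-- one pass over edges filling the three adjacency lists (g1, g2, g3)
def buildB (s : List (List Int) × List (List Int) × List (List Int)) (e : List Int) :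
    List (List Int) × List (List Int) × List (List Int) :=
  let t := PySem.List.pyGetD e 0 0
  let u := PySem.List.pyGetD e 1 0
  let v := PySem.List.pyGetD e 2 0
  if t = 3 then (addEdgeB s.1 u v, addEdgeB s.2.1 u v, addEdgeB s.2.2 u v)
  else if t = 1 then (addEdgeB s.1 u v, s.2.1, s.2.2)
  else if t = 2 then (s.1, addEdgeB s.2.1 u v, s.2.2)
  else s

-- 'for y in g[x]: if not visited[y]: visited[y] = True; stack.append(y)'
-- (the port keeps the stack reversed: head = Python's last element = the element pop() removes)
def dfsPush (p : List Bool × List Int) (y : Int) : List Bool × List Int :=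
  if PySem.List.pyGetD p.1 y false then p else (PySem.List.pySetD p.1 y true, y :: p.2)

-- 'while stack: x = stack.pop(); …' — fuel recursion; the fuel passed below is proved sufficient
def dfsLoop : Nat → List (List Int) → List Bool → List Int → List Bool
  | 0, _, visited, _ => visited
  | _ + 1, _, visited, [] => visited
  | fuel + 1, g, visited, x :: stack =>
    let r := (PySem.List.pyGetD g x []).foldl dfsPush (visited, stack)
    dfsLoop fuel g r.1 r.2

-- 'for s in range(1, n+1): if not visited[s]: comps += 1; visited[s] = True; stack = [s]; while …'
def compStep (g : List (List Int)) (p : List Bool × Int) (s : Int) : List Bool × Int :=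
  if PySem.List.pyGetD p.1 s false then p
  else (dfsLoop (2 * p.1.length + 1) g (PySem.List.pySetD p.1 s true) [s], p.2 + 1)

def componentsB (n : Int) (g : List (List Int)) : Int :=
  ((PySem.List.pyRange 1 (n + 1) 1).foldl (compStep g)
    (List.replicate (n + 1).toNat false, 0)).2

def max_num_edges_to_remove_2_alt (n : Int) (edges : List (List Int)) : Int :=
  let gs := edges.foldl buildB
    (List.replicate (n + 1).toNat [], List.replicate (n + 1).toNat [],
     List.replicate (n + 1).toNat [])
  let c1 := componentsB n gs.1
  let c2 := componentsB n gs.2.1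
  if c1 > 1 ∨ c2 > 1 then -1
  else
    let c3 := componentsB n gs.2.2
    (edges.length : Int) - (n + c3 - c1 - c2)

-- ===== PRECONDITION & SPEC =====
def pvLabelOK (n w : Int) : Bool := decide ((1 ≤ w ∧ w ≤ n) ∨ (-n ≤ w ∧ w ≤ -1))

def pvEdgeOK (n : Int) (e : List Int) : Bool :=
  match e with
  | [t, u, v] =>
    if t = 1 ∨ t = 2 ∨ t = 3 then pvLabelOK n u && pvLabelOK n v else true
  | _ => false

-- Pre_ restricts to the problem's natural domain: at least one node (1 ≤ n) and every edge a
-- 3-element list [t, u, v] whose endpoints, for union types t ∈ {1,2,3}, name real nodes — a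
-- label 1..n or its Python negative alias -n..-1 (list indexing reads uf[-k] as uf[n+1-k],
-- identically in A and B). Excluded are only inputs on which A raises (unpacking/IndexError),
-- degenerate node counts n ≤ 0, and union edges whose endpoint 0 (or its alias -(n+1)) drags
-- the unused node 0 into the graph; A's values on the latter two are accidents of its extra
-- array slot and are not reproduced.
def Pre_max_num_edges_to_remove_2 (n : Int) (edges : List (List Int)) : Prop :=
  1 ≤ n ∧ edges.all (pvEdgeOK n) = true
instance (n : Int) (edges : List (List Int)) : Decidable (Pre_max_num_edges_to_remove_2 n edges) := by
  unfold Pre_max_num_edges_to_remove_2; infer_instance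

def pvWitness_max_num_edges_to_remove_2 : Int × List (List Int) :=
  (4, [[3, 1, 2], [3, 2, 3], [1, 1, 3], [1, 2, 4], [1, 1, 2], [2, 3, 4]])

def Spec_max_num_edges_to_remove_2 (n : Int) (edges : List (List Int)) (out : Int) : Prop :=
  out = max_num_edges_to_remove_2_alt n edges
instance (n : Int) (edges : List (List Int)) (out : Int) :
    Decidable (Spec_max_num_edges_to_remove_2 n edges out) := by
  unfold Spec_max_num_edges_to_remove_2; infer_instance

-- ===== CLAIM (what is proved, stated in full; the proofs are below) =====
def Claim_equal_max_num_edges_to_remove_2 : Prop :=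
  ∀ (n : Int) (edges : List (List Int)), Dom_max_num_edges_to_remove_2 n edges →
    Pre_max_num_edges_to_remove_2 n edges →
    Spec_max_num_edges_to_remove_2 n edges (max_num_edges_to_remove_2 n edges)

-- ===== LEMMAS AND PROOFS =====

-- ---------- generic Python-list access utilities ----------

theorem length_pySetD' {α : Type} (xs : List α) (j : Int) (v : α) :
    (PySem.List.pySetD xs j v).length = xs.length := PySem.List.length_pySetD xs j v

theorem pyGetD_pySetD {α : Type} (xs : List α) (j i : Int) (v d : α)
    (hj0 : 0 ≤ j) (hi0 : 0 ≤ i) (hi : i < (xs.length : Int)) :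
    PySem.List.pyGetD (PySem.List.pySetD xs j v) i d = if i = j then v else PySem.List.pyGetD xs i d := by
  rw [PySem.List.pySetD_of_nonneg xs v hj0]
  rw [PySem.List.pyGetD_eq_getElem _ d hi0 (by simp; omega),
      PySem.List.pyGetD_eq_getElem _ d hi0 (by simpa using hi)]
  rw [List.getElem_set]
  by_cases h : i = j
  · have : j.toNat = i.toNat := by omega
    simp [h, this]
  · have : j.toNat ≠ i.toNat := by omega
    simp [this, h]

-- negative-index (Python wraparound) normalisation
theorem pyGetD_wrap {α : Type} (xs : List α) (d : α) (x : Int)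
    (h1 : -(xs.length : Int) ≤ x) (h2 : x < 0) :
    PySem.List.pyGetD xs x d = PySem.List.pyGetD xs (x + (xs.length : Int)) d := by
  have hk1 : 0 < (-x).toNat := by omega
  have hk2 : (-x).toNat ≤ xs.length := by omega
  have hx : x = -(((-x).toNat : Nat) : Int) := by omega
  rw [hx, PySem.List.pyGetD_neg_natCast xs (-x).toNat d hk1 hk2]
  rw [PySem.List.pyGetD_eq_getElem _ d (by omega) (by omega)]
  congr 1
  omega

theorem pySetD_wrap {α : Type} (xs : List α) (v : α) (x : Int)
    (h1 : -(xs.length : Int) ≤ x) (h2 : x < 0) :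
    PySem.List.pySetD xs x v = PySem.List.pySetD xs (x + (xs.length : Int)) v := by
  simp only [PySem.List.pySetD, PySem.List.pySet?, PySem.List.pyIdx?]
  rw [if_neg (by omega), if_pos h1, if_pos (by omega : (0:Int) ≤ x + (xs.length : Int)),
    if_pos (by omega : x + (xs.length : Int) < (xs.length : Int))]
  have h3 : xs.length - (-x).toNat = (x + (xs.length : Int)).toNat := by omega
  rw [h3]

theorem pySetD_self {α : Type} (xs : List α) {x : Int} {w : α} (d : α)
    (h0 : 0 ≤ x) (hL : x < (xs.length : Int)) (hw : PySem.List.pyGetD xs x d = w) :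
    PySem.List.pySetD xs x w = xs := by
  rw [PySem.List.pySetD_of_nonneg xs w h0]
  rw [PySem.List.pyGetD_eq_getElem _ d h0 hL] at hw
  rw [← hw]
  exact List.set_getElem_self (by omega)

theorem pyGetD_replicate {α : Type} (m : Nat) (a d : α) (i : Int)
    (h0 : 0 ≤ i) (hm : i < (m : Int)) :
    PySem.List.pyGetD (List.replicate m a) i d = a := by
  rw [PySem.List.pyGetD_eq_getElem _ d h0 (by simpa using hm)]
  exact List.getElem_replicate _

theorem pyGetD_cons1 (t u v : Int) : PySem.List.pyGetD [t, u, v] 1 0 = u := by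
  rw [PySem.List.pyGetD_ofNat']; rfl

theorem pyGetD_cons2 (t u v : Int) : PySem.List.pyGetD [t, u, v] 2 0 = v := by
  rw [PySem.List.pyGetD_ofNat']; rfl

-- ---------- abstraction of A's union-find arrays ----------

-- the parent pointer uf[i]
def prnt (uf : List Int) (i : Int) : Int := PySem.List.pyGetD uf i 0

-- i is a usable node index of a parent array of (integer) length L: 1 ≤ i < L (node 0 is never touched)
def InR (L i : Int) : Prop := 1 ≤ i ∧ i < L

-- following parent pointers from x reaches the root r
inductive Reaches (uf : List Int) : Int → Int → Prop
  | root {x : Int} : prnt uf x = x → Reaches uf x x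
  | step {x r : Int} : prnt uf x ≠ x → Reaches uf (prnt uf x) r → Reaches uf x r

-- the abstraction invariant: parents stay in range, every node reaches its abstract root ρ i,
-- and d certifies acyclicity (d strictly decreases along parent pointers)
structure AbsD (uf : List Int) (ρ : Int → Int) (d : Int → Nat) : Prop where
  par : ∀ i, InR (uf.length : Int) i → InR (uf.length : Int) (prnt uf i)
  rch : ∀ i, InR (uf.length : Int) i → Reaches uf i (ρ i)
  dec : ∀ i, InR (uf.length : Int) i → prnt uf i ≠ i → d (prnt uf i) < d i

def mergeFn (ρ : Int → Int) (a b : Int) : Int → Int := fun x => if ρ x = b then a else ρ x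

noncomputable def mval (d : Int → Nat) (L x : Int) : Nat :=
  ((Finset.Icc 1 (L - 1)).filter (fun y => d y < d x)).card

noncomputable def rootsOf (n : Int) (ρ : Int → Int) : Finset Int := (Finset.Icc 1 n).filter (fun i => ρ i = i)

theorem reaches_unique {uf : List Int} {x r s : Int} (h1 : Reaches uf x r) (h2 : Reaches uf x s) :
    r = s := by
  induction h1 with
  | root hx => cases h2 with
    | root _ => rfl
    | step hne _ => exact absurd hx hne
  | step hne _ ih => cases h2 with
    | root hx => exact absurd hx hne
    | step _ hr => exact ih hr

theorem reaches_root_fix {uf : List Int} {x r : Int} (h : Reaches uf x r) : prnt uf r = r := by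
  induction h with
  | root hx => exact hx
  | step _ _ ih => exact ih

theorem reaches_inR {uf : List Int} {ρ : Int → Int} {d : Int → Nat} (habs : AbsD uf ρ d)
    {x r : Int} (h : Reaches uf x r) (hx : InR (uf.length : Int) x) : InR (uf.length : Int) r := by
  induction h with
  | root _ => exact hx
  | step hne hr ih => exact ih (habs.par _ hx)

theorem d_lt_of_reaches {uf : List Int} {ρ : Int → Int} {d : Int → Nat} (habs : AbsD uf ρ d)
    {x r : Int} (h : Reaches uf x r) (hx : InR (uf.length : Int) x) (hne : x ≠ r) : d r < d x := by
  induction h with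
  | root _ => exact absurd rfl hne
  | @step x' r' hp hr ih =>
    by_cases hpr : prnt uf x' = r'
    · exact hpr ▸ habs.dec _ hx hp
    · exact lt_trans (ih (habs.par _ hx) hpr) (habs.dec _ hx hp)

theorem absd_rho_root {uf ρ d} (habs : AbsD uf ρ d) {i : Int} (hi : InR (uf.length : Int) i) :
    prnt uf (ρ i) = ρ i := reaches_root_fix (habs.rch i hi)

theorem absd_rho_inR {uf ρ d} (habs : AbsD uf ρ d) {i : Int} (hi : InR (uf.length : Int) i) :
    InR (uf.length : Int) (ρ i) := reaches_inR habs (habs.rch i hi) hi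

theorem absd_rho_idem {uf ρ d} (habs : AbsD uf ρ d) {i : Int} (hi : InR (uf.length : Int) i) :
    ρ (ρ i) = ρ i :=
  reaches_unique (habs.rch _ (absd_rho_inR habs hi)) (Reaches.root (absd_rho_root habs hi))

theorem absd_rho_of_root {uf ρ d} (habs : AbsD uf ρ d) {i : Int} (hi : InR (uf.length : Int) i)
    (hr : prnt uf i = i) : ρ i = i := reaches_unique (habs.rch i hi) (Reaches.root hr)

theorem absd_rho_ne {uf ρ d} (habs : AbsD uf ρ d) {i : Int} (hi : InR (uf.length : Int) i)
    (hnr : prnt uf i ≠ i) : ρ i ≠ i := by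
  intro h
  exact hnr (by calc prnt uf i = prnt uf (ρ i) := by rw [h]
                _ = ρ i := absd_rho_root habs hi
                _ = i := h)

theorem reaches_step_inv {uf : List Int} {x r : Int} (h : Reaches uf x r)
    (hne : prnt uf x ≠ x) : Reaches uf (prnt uf x) r := by
  cases h with
  | root hx => exact absurd hx hne
  | step _ hr => exact hr

theorem absd_rho_prnt {uf ρ d} (habs : AbsD uf ρ d) {i : Int} (hi : InR (uf.length : Int) i)
    (hnr : prnt uf i ≠ i) : ρ (prnt uf i) = ρ i :=
  reaches_unique (habs.rch _ (habs.par _ hi)) (reaches_step_inv (habs.rch i hi) hnr)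

theorem prnt_pySetD {uf : List Int} {j i : Int} (v : Int)
    (hj0 : 0 ≤ j) (hi0 : 0 ≤ i) (hi : i < (uf.length : Int)) :
    prnt (PySem.List.pySetD uf j v) i = if i = j then v else prnt uf i :=
  pyGetD_pySetD uf j i v 0 hj0 hi0 hi

-- Reaches is preserved by a path-compression write uf[x] := ρ x
theorem reaches_compress {uf ρ d} (habs : AbsD uf ρ d) {x : Int} (hx : InR (uf.length : Int) x)
    (hne : ρ x ≠ x) : ∀ {y r : Int}, InR (uf.length : Int) y → Reaches uf y r →
      Reaches (PySem.List.pySetD uf x (ρ x)) y r := by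
  intro y r hy h
  have hnr : prnt uf x ≠ x := fun hfix => hne (absd_rho_of_root habs hx hfix)
  have hrx := absd_rho_inR habs hx
  have hprnt : ∀ {i : Int}, InR (uf.length : Int) i →
      prnt (PySem.List.pySetD uf x (ρ x)) i = if i = x then ρ x else prnt uf i := by
    intro i hi
    exact prnt_pySetD _ (le_trans zero_le_one hx.1) (le_trans zero_le_one hi.1) hi.2
  induction h with
  | @root y' hfix =>
    have hyx : y' ≠ x := fun h => hnr (by rw [← h]; exact hfix)
    exact Reaches.root (by rw [hprnt hy, if_neg hyx]; exact hfix)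
  | @step y' r' hp hr ih =>
    by_cases hyx : y' = x
    · subst hyx
      have hreq : r' = ρ y' := reaches_unique (Reaches.step hp hr) (habs.rch _ hy)
      subst hreq
      refine Reaches.step ?_ ?_
      · rw [hprnt hy, if_pos rfl]; exact hne
      · rw [hprnt hy, if_pos rfl]
        refine Reaches.root ?_
        rw [hprnt hrx, if_neg hne]
        exact absd_rho_root habs hy
    · refine Reaches.step ?_ ?_
      · rw [hprnt hy, if_neg hyx]; exact hp
      · rw [hprnt hy, if_neg hyx]; exact ih (habs.par _ hy)

-- writing uf[x] := ρ x (path compression step) preserves the abstraction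
theorem absd_compress {uf ρ d} (habs : AbsD uf ρ d) {x : Int} (hx : InR (uf.length : Int) x)
    (hne : ρ x ≠ x) : AbsD (PySem.List.pySetD uf x (ρ x)) ρ d := by
  have hlen : ((PySem.List.pySetD uf x (ρ x)).length : Int) = (uf.length : Int) := by
    rw [length_pySetD']
  have hprnt : ∀ {i : Int}, InR (uf.length : Int) i →
      prnt (PySem.List.pySetD uf x (ρ x)) i = if i = x then ρ x else prnt uf i := by
    intro i hi
    exact prnt_pySetD _ (le_trans zero_le_one hx.1) (le_trans zero_le_one hi.1) hi.2
  have hrx := absd_rho_inR habs hx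
  have hnr : prnt uf x ≠ x := fun hfix => hne (absd_rho_of_root habs hx hfix)
  refine ⟨?_, ?_, ?_⟩
  · intro i hi
    rw [hlen] at hi ⊢
    rw [hprnt hi]
    by_cases h : i = x
    · simpa [h] using hrx
    · simpa [h] using habs.par i hi
  · intro i hi
    rw [hlen] at hi
    exact reaches_compress habs hx hne hi (habs.rch i hi)
  · intro i hi hne'
    rw [hlen] at hi
    rw [hprnt hi] at hne' ⊢
    by_cases h : i = x
    · subst h
      rw [if_pos rfl] at hne' ⊢
      exact d_lt_of_reaches habs (habs.rch i hi) hi (fun hh => hne hh.symm)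
    · rw [if_neg h] at hne' ⊢
      exact habs.dec i hi hne'

-- linking root b under root a merges the two classes
theorem reaches_link {uf ρ d} (habs : AbsD uf ρ d) {a b : Int}
    (ha : InR (uf.length : Int) a) (hb : InR (uf.length : Int) b)
    (hra : prnt uf a = a) (hrb : prnt uf b = b) (hab : a ≠ b) :
    ∀ {y r : Int}, InR (uf.length : Int) y → Reaches uf y r →
      Reaches (PySem.List.pySetD uf b a) y (if r = b then a else r) := by
  intro y r hy h
  have hprnt : ∀ {i : Int}, InR (uf.length : Int) i →
      prnt (PySem.List.pySetD uf b a) i = if i = b then a else prnt uf i := by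
    intro i hi
    exact prnt_pySetD _ (le_trans zero_le_one hb.1) (le_trans zero_le_one hi.1) hi.2
  have hroota : Reaches (PySem.List.pySetD uf b a) a a :=
    Reaches.root (by rw [hprnt ha, if_neg hab]; exact hra)
  induction h with
  | @root y' hfix =>
    by_cases hyb : y' = b
    · subst hyb
      rw [if_pos rfl]
      exact Reaches.step (by rw [hprnt hy, if_pos rfl]; exact hab)
        (by rw [hprnt hy, if_pos rfl]; exact hroota)
    · rw [if_neg hyb]
      exact Reaches.root (by rw [hprnt hy, if_neg hyb]; exact hfix)
  | @step y' r' hp hr ih =>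
    have hyb : y' ≠ b := fun h => hp (by rw [h]; exact hrb)
    exact Reaches.step (by rw [hprnt hy, if_neg hyb]; exact hp)
      (by rw [hprnt hy, if_neg hyb]; exact ih (habs.par _ hy))

theorem absd_link {uf ρ d} (habs : AbsD uf ρ d) {a b : Int}
    (ha : InR (uf.length : Int) a) (hb : InR (uf.length : Int) b)
    (hra : prnt uf a = a) (hrb : prnt uf b = b) (hab : a ≠ b) :
    AbsD (PySem.List.pySetD uf b a) (mergeFn ρ a b)
      (fun y => if ρ y = b then d y + d a + 1 else d y) := by
  have hlen : ((PySem.List.pySetD uf b a).length : Int) = (uf.length : Int) := by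
    rw [length_pySetD']
  have hprnt : ∀ {i : Int}, InR (uf.length : Int) i →
      prnt (PySem.List.pySetD uf b a) i = if i = b then a else prnt uf i := by
    intro i hi
    exact prnt_pySetD _ (le_trans zero_le_one hb.1) (le_trans zero_le_one hi.1) hi.2
  have hrhoa : ρ a = a := absd_rho_of_root habs ha hra
  have hrhob : ρ b = b := absd_rho_of_root habs hb hrb
  refine ⟨?_, ?_, ?_⟩
  · intro i hi
    rw [hlen] at hi ⊢
    rw [hprnt hi]
    by_cases h : i = b
    · simpa [h] using ha
    · simpa [h] using habs.par i hi
  · intro i hi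
    rw [hlen] at hi
    have := reaches_link habs ha hb hra hrb hab hi (habs.rch i hi)
    simpa [mergeFn] using this
  · intro i hi hne'
    rw [hlen] at hi
    rw [hprnt hi] at hne' ⊢
    by_cases h : i = b
    · rw [if_pos h] at hne' ⊢
      have hne2 : ρ a ≠ b := by rw [hrhoa]; exact hab
      simp [hne2, h, hrhob]
    · rw [if_neg h] at hne' ⊢
      have hrp : ρ (prnt uf i) = ρ i := absd_rho_prnt habs hi hne'
      have hd := habs.dec i hi hne'
      by_cases hc : ρ i = b
      · rw [hrp, if_pos hc, if_pos hc]; omega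
      · rw [hrp, if_neg hc, if_neg hc]; omega

theorem mval_step {uf ρ d} (habs : AbsD uf ρ d) {i : Int} (hi : InR (uf.length : Int) i)
    (hnr : prnt uf i ≠ i) :
    mval d (uf.length : Int) (prnt uf i) < mval d (uf.length : Int) i := by
  have hp := habs.par i hi
  have hd := habs.dec i hi hnr
  apply Finset.card_lt_card
  constructor
  · intro y hy
    simp only [Finset.mem_filter] at hy ⊢
    exact ⟨hy.1, lt_trans hy.2 hd⟩
  · intro hsub
    have hmem : prnt uf i ∈ (Finset.Icc 1 ((uf.length : Int) - 1)).filter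
        (fun y => d y < d i) := by
      simp only [Finset.mem_filter, Finset.mem_Icc]
      exact ⟨⟨hp.1, by have := hp.2; omega⟩, hd⟩
    have := hsub hmem
    simp only [Finset.mem_filter] at this
    exact lt_irrefl _ this.2

theorem mval_lt_length (d : Int → Nat) (uf : List Int) (x : Int) (h : uf ≠ []) :
    mval d (uf.length : Int) x < uf.length := by
  have h1 : 1 ≤ uf.length := List.length_pos_iff.mpr h
  calc mval d (uf.length : Int) x ≤ (Finset.Icc (1 : Int) ((uf.length : Int) - 1)).card :=
        Finset.card_filter_le _ _
    _ = ((uf.length : Int) - 1 + 1 - 1).toNat := Int.card_Icc _ _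
    _ < uf.length := by omega

theorem findA_go (fuel : Nat) : ∀ (uf : List Int) (ρ : Int → Int) (d : Int → Nat) (x : Int),
    AbsD uf ρ d → InR (uf.length : Int) x → mval d (uf.length : Int) x < fuel →
    ∃ uf2, findA fuel uf x = (uf2, ρ x) ∧ uf2.length = uf.length ∧ AbsD uf2 ρ d := by
  induction fuel with
  | zero => intro uf ρ d x _ _ hf; exact absurd hf (Nat.not_lt_zero _)
  | succ fuel ih =>
    intro uf ρ d x habs hx hf
    by_cases hp : prnt uf x = x
    · refine ⟨uf, ?_, rfl, habs⟩
      have hrx : ρ x = x := absd_rho_of_root habs hx hp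
      simp only [findA]
      rw [if_neg (show ¬(PySem.List.pyGetD uf x 0 ≠ x) from fun h => h hp)]
      rw [show PySem.List.pyGetD uf x 0 = x from hp, hrx]
    · have hxp := habs.par x hx
      have hm : mval d (uf.length : Int) (prnt uf x) < fuel := by
        have := mval_step habs hx hp
        omega
      obtain ⟨uf1, heq, hlen1, habs1⟩ := ih uf ρ d (prnt uf x) habs hxp hm
      have hrp : ρ (prnt uf x) = ρ x := absd_rho_prnt habs hx hp
      have hrne : ρ x ≠ x := absd_rho_ne habs hx hp
      have hx1 : InR ((uf1.length : Int)) x := by rw [hlen1]; exact hx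
      have habs2 := absd_compress habs1 hx1 hrne
      refine ⟨PySem.List.pySetD uf1 x (ρ x), ?_, ?_, habs2⟩
      · simp only [findA]
        rw [if_pos (show PySem.List.pyGetD uf x 0 ≠ x from hp)]
        show (PySem.List.pySetD (findA fuel uf (PySem.List.pyGetD uf x 0)).1 x
          (findA fuel uf (PySem.List.pyGetD uf x 0)).2,
          (findA fuel uf (PySem.List.pyGetD uf x 0)).2) = _
        have heq' : findA fuel uf (PySem.List.pyGetD uf x 0) = (uf1, ρ x) := by
          rw [show PySem.List.pyGetD uf x 0 = prnt uf x from rfl, heq, hrp]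
        rw [heq']
      · rw [length_pySetD', hlen1]

theorem findA_spec {uf ρ d} (habs : AbsD uf ρ d) {x : Int} (hx : InR (uf.length : Int) x) :
    ∃ uf2, findA uf.length uf x = (uf2, ρ x) ∧ uf2.length = uf.length ∧ AbsD uf2 ρ d :=
  findA_go uf.length uf ρ d x habs hx
    (mval_lt_length d uf x (by intro h; rw [h] at hx; simp [InR] at hx; omega))

theorem unionA_spec_eq {uf ρ d} (habs : AbsD uf ρ d) (rank : List Int) {x y : Int}
    (hx : InR (uf.length : Int) x) (hy : InR (uf.length : Int) y) (heq : ρ x = ρ y) :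
    ∃ uf2, unionA uf rank x y = (uf2, rank, 0) ∧ uf2.length = uf.length ∧ AbsD uf2 ρ d := by
  obtain ⟨uf1, h1, hlen1, habs1⟩ := findA_spec habs hx
  have hy1 : InR ((uf1.length : Int)) y := by rw [hlen1]; exact hy
  obtain ⟨uf2, h2, hlen2, habs2⟩ := findA_spec habs1 hy1
  refine ⟨uf2, ?_, by rw [hlen2, hlen1], habs2⟩
  unfold unionA
  rw [h1]
  show (if (uf1, ρ x).2 = (findA uf1.length uf1 y).2 then ((findA uf1.length uf1 y).1, rank, 0)
      else _) = _
  rw [h2]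
  simp [heq]

theorem unionA_spec_ne {uf ρ d} (habs : AbsD uf ρ d) (rank : List Int) {x y : Int}
    (hx : InR (uf.length : Int) x) (hy : InR (uf.length : Int) y) (hne : ρ x ≠ ρ y) :
    ∃ uf' rank' d' a b, unionA uf rank x y = (uf', rank', 1) ∧ uf'.length = uf.length ∧
      ((a, b) = (ρ x, ρ y) ∨ (a, b) = (ρ y, ρ x)) ∧ AbsD uf' (mergeFn ρ a b) d' := by
  obtain ⟨uf1, h1, hlen1, habs1⟩ := findA_spec habs hx
  have hy1 : InR ((uf1.length : Int)) y := by rw [hlen1]; exact hy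
  have hx1 : InR ((uf1.length : Int)) x := by rw [hlen1]; exact hx
  obtain ⟨uf2, h2, hlen2, habs2⟩ := findA_spec habs1 hy1
  have hx2 : InR ((uf2.length : Int)) x := by rw [hlen2]; exact hx1
  have hy2 : InR ((uf2.length : Int)) y := by rw [hlen2]; exact hy1
  have hrootx : prnt uf2 (ρ x) = ρ x := absd_rho_root habs2 hx2
  have hrooty : prnt uf2 (ρ y) = ρ y := absd_rho_root habs2 hy2
  have hrxin : InR ((uf2.length : Int)) (ρ x) := absd_rho_inR habs2 hx2
  have hryin : InR ((uf2.length : Int)) (ρ y) := absd_rho_inR habs2 hy2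
  by_cases hcmp : PySem.List.pyGetD rank (ρ x) 0 < PySem.List.pyGetD rank (ρ y) 0
  · have habs3 := absd_link habs2 hryin hrxin hrooty hrootx (fun h => hne h.symm)
    refine ⟨PySem.List.pySetD uf2 (ρ x) (ρ y),
      PySem.List.pySetD rank (ρ y) (PySem.List.pyGetD rank (ρ y) 0 + PySem.List.pyGetD rank (ρ x) 0),
      _, ρ y, ρ x, ?_, ?_, Or.inr rfl, habs3⟩
    · unfold unionA
      rw [h1]
      show (if (uf1, ρ x).2 = (findA uf1.length uf1 y).2 then _ else _) = _
      rw [h2]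
      simp only [if_neg hne]
      rw [if_pos hcmp]
    · rw [length_pySetD', hlen2, hlen1]
  · have habs3 := absd_link habs2 hrxin hryin hrootx hrooty hne
    refine ⟨PySem.List.pySetD uf2 (ρ y) (ρ x),
      PySem.List.pySetD rank (ρ x) (PySem.List.pyGetD rank (ρ x) 0 + PySem.List.pyGetD rank (ρ y) 0),
      _, ρ x, ρ y, ?_, ?_, Or.inl rfl, habs3⟩
    · unfold unionA
      rw [h1]
      show (if (uf1, ρ x).2 = (findA uf1.length uf1 y).2 then _ else _) = _
      rw [h2]
      simp only [if_neg hne]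
      rw [if_neg hcmp]
    · rw [length_pySetD', hlen2, hlen1]

-- the two sides of a merged class coincide iff both old classes lie in {class of a, class of b}
theorem mergeFn_eq_iff {ρ : Int → Int} {a b x y : Int} (hab : a ≠ b) :
    mergeFn ρ a b x = mergeFn ρ a b y ↔
      (((ρ x = a ∨ ρ x = b) ∧ (ρ y = a ∨ ρ y = b)) ∨ ρ x = ρ y) := by
  unfold mergeFn
  by_cases h1 : ρ x = b <;> by_cases h2 : ρ y = b <;> simp [h1, h2] <;> omega

theorem rootsOf_merge {n : Int} {ρ : Int → Int} {a b : Int} (hra : ρ a = a) (hrb : ρ b = b)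
    (hab : a ≠ b) : rootsOf n (mergeFn ρ a b) = (rootsOf n ρ).erase b := by
  ext i
  simp only [rootsOf, Finset.mem_erase, Finset.mem_filter, mergeFn]
  constructor
  · intro ⟨hic, hmi⟩
    by_cases h : ρ i = b
    · rw [if_pos h] at hmi
      subst hmi
      exact absurd (hra.symm.trans h) hab
    · rw [if_neg h] at hmi
      exact ⟨fun hh => h (by rw [hh]; exact hrb), hic, hmi⟩
  · intro ⟨hib, hic, hri⟩
    refine ⟨hic, ?_⟩
    rw [if_neg (by rw [hri]; exact hib), hri]

theorem mem_rootsOf {n : Int} {ρ : Int → Int} {b : Int} (hb1 : 1 ≤ b) (hb2 : b ≤ n)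
    (hrb : ρ b = b) : b ∈ rootsOf n ρ := by
  simp only [rootsOf, Finset.mem_filter, Finset.mem_Icc]
  exact ⟨⟨hb1, hb2⟩, hrb⟩

theorem findA_length : ∀ (fuel : Nat) (uf : List Int) (x : Int),
    (findA fuel uf x).1.length = uf.length := by
  intro fuel
  induction fuel with
  | zero => intro uf x; rfl
  | succ f ih =>
    intro uf x
    simp only [findA]
    by_cases h : PySem.List.pyGetD uf x 0 ≠ x
    · rw [if_pos h]
      show (PySem.List.pySetD (findA f uf _).1 x (findA f uf _).2).length = _
      rw [length_pySetD']
      exact ih uf _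
    · rw [if_neg h]

theorem findA_root {uf : List Int} {p : Int} (hp : PySem.List.pyGetD uf p 0 = p) :
    ∀ fuel, findA fuel uf p = (uf, p) := by
  intro fuel
  cases fuel with
  | zero => simp only [findA]; rw [hp]
  | succ f =>
    simp only [findA]
    rw [if_neg (show ¬PySem.List.pyGetD uf p 0 ≠ p from fun h => h hp), hp]

theorem findA_wrap {uf : List Int} {ρ : Int → Int} {d : Int → Nat} (habs : AbsD uf ρ d) {x : Int}
    (hx1 : -(uf.length : Int) < x) (hx2 : x < 0) :
    ∀ fuel, findA fuel uf x = findA fuel uf (x + (uf.length : Int)) := by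
  intro fuel
  have hxL : InR ((uf.length : Int)) (x + (uf.length : Int)) := ⟨by omega, by omega⟩
  have hread : PySem.List.pyGetD uf x 0 = PySem.List.pyGetD uf (x + (uf.length : Int)) 0 :=
    pyGetD_wrap uf 0 x (by omega) hx2
  cases fuel with
  | zero => simp only [findA]; rw [hread]
  | succ f =>
    have hp := habs.par _ hxL
    have hq1 : 1 ≤ PySem.List.pyGetD uf (x + (uf.length : Int)) 0 := hp.1
    simp only [findA]
    rw [hread]
    rw [if_pos (show PySem.List.pyGetD uf (x + (uf.length : Int)) 0 ≠ x by omega)]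
    by_cases hroot : PySem.List.pyGetD uf (x + (uf.length : Int)) 0 = x + (uf.length : Int)
    · rw [if_neg (fun h => h hroot)]
      have hq : PySem.List.pyGetD uf (PySem.List.pyGetD uf (x + (uf.length : Int)) 0) 0 =
          PySem.List.pyGetD uf (x + (uf.length : Int)) 0 := by
        rw [hroot]; exact hroot
      rw [findA_root hq f]
      simp only
      rw [pySetD_wrap uf _ x (by omega) hx2, hroot,
        pySetD_self uf 0 (by omega) (by have := hxL.2; omega) hroot]
    · rw [if_pos hroot]
      have hlen := findA_length f uf (PySem.List.pyGetD uf (x + (uf.length : Int)) 0)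
      rw [pySetD_wrap _ _ x (by rw [hlen]; omega) hx2, hlen]

-- normalisation of a possibly-negative Python label
def nrmI (L w : Int) : Int := if w < 0 then w + L else w

theorem unionA_wrap {uf : List Int} {ρ : Int → Int} {d : Int → Nat} (habs : AbsD uf ρ d)
    (rank : List Int) {u v : Int}
    (hu : -(uf.length : Int) < u) (hv : -(uf.length : Int) < v)
    (huIn : InR ((uf.length : Int)) (nrmI ((uf.length : Int)) u))
    (hvIn : InR ((uf.length : Int)) (nrmI ((uf.length : Int)) v)) :
    unionA uf rank u v = unionA uf rank (nrmI ((uf.length : Int)) u)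
      (nrmI ((uf.length : Int)) v) := by
  obtain ⟨uf1, h1, hlen1, habs1⟩ := findA_spec habs huIn
  have step1 : findA uf.length uf u = findA uf.length uf (nrmI ((uf.length : Int)) u) := by
    unfold nrmI
    by_cases hus : u < 0
    · rw [if_pos hus]; exact findA_wrap habs hu hus uf.length
    · rw [if_neg hus]
  have step2 : findA uf1.length uf1 v = findA uf1.length uf1 (nrmI ((uf.length : Int)) v) := by
    unfold nrmI
    by_cases hvs : v < 0
    · rw [if_pos hvs]
      have := findA_wrap habs1 (x := v) (by rw [hlen1]; omega) hvs uf1.length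
      rw [this, hlen1]
    · rw [if_neg hvs]
  unfold unionA
  rw [step1, h1]
  show (if ((uf1, ρ (nrmI (↑uf.length) u)).2 = (findA uf1.length uf1 v).2) then _ else _) = _
  rw [step2]

-- a legal label: a node 1..n or its Python negative alias -n..-1
def LabOK (n w : Int) : Prop := (1 ≤ w ∧ w ≤ n) ∨ (-n ≤ w ∧ w ≤ -1)

theorem labOK_of_pv {n w : Int} (h : pvLabelOK n w = true) : LabOK n w := by
  simpa [pvLabelOK, LabOK] using h

theorem nrmI_bounds {n w : Int} (hn : 1 ≤ n) (h : LabOK n w) :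
    1 ≤ nrmI (n + 1) w ∧ nrmI (n + 1) w ≤ n ∧ -(n + 1) < w := by
  unfold nrmI
  rcases h with ⟨h1, h2⟩ | ⟨h1, h2⟩ <;> split <;> omega

-- a well-formed DSU array of logical size N realising the abstract root map ρ
def Dsu (N : Nat) (uf : List Int) (ρ : Int → Int) : Prop := uf.length = N ∧ ∃ d, AbsD uf ρ d

theorem inR_shift {n i : Int} (hn : 1 ≤ n) {uf : List Int} (hlen : uf.length = (n + 1).toNat)
    (hi : InR (n + 1) i) : InR ((uf.length : Int)) i := by
  constructor
  · exact hi.1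
  · rw [hlen]; have := hi.2; omega

theorem inR_unshift {n i : Int} (hn : 1 ≤ n) {uf : List Int} (hlen : uf.length = (n + 1).toNat)
    (hi : InR ((uf.length : Int)) i) : InR (n + 1) i := by
  constructor
  · exact hi.1
  · have := hi.2; rw [hlen] at this; omega

theorem verifyA_pass {n : Int} (hn : 1 ≤ n) {ρ1 ρ2 : Int → Int} :
    ∀ (is : List Int) (uf1 uf2 : List Int), Dsu (n + 1).toNat uf1 ρ1 →
      Dsu (n + 1).toNat uf2 ρ2 → (∀ i ∈ is, InR (n + 1) i) →
      (∀ i ∈ is, ρ1 i = ρ1 1 ∧ ρ2 i = ρ2 1) → ∀ res, verifyA is uf1 uf2 res = res := by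
  intro is
  induction is with
  | nil => intro uf1 uf2 _ _ _ _ res; rfl
  | cons i is ih =>
    intro uf1 uf2 hd1 hd2 hmem hconn res
    obtain ⟨hl1, d1, habs1⟩ := hd1
    obtain ⟨hl2, d2, habs2⟩ := hd2
    have hiin := hmem i List.mem_cons_self
    have h1in : InR (n + 1) 1 := ⟨le_refl 1, by omega⟩
    obtain ⟨uf1a, e1a, l1a, h1a⟩ := findA_spec habs1 (inR_shift hn hl1 hiin)
    obtain ⟨uf1b, e1b, l1b, h1b⟩ := findA_spec h1a (inR_shift hn (l1a.trans hl1) h1in)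
    obtain ⟨uf2a, e2a, l2a, h2a⟩ := findA_spec habs2 (inR_shift hn hl2 hiin)
    obtain ⟨uf2b, e2b, l2b, h2b⟩ := findA_spec h2a (inR_shift hn (l2a.trans hl2) h1in)
    obtain ⟨hr1, hr2⟩ := hconn i List.mem_cons_self
    simp only [verifyA, e1a, e1b, e2a, e2b]
    rw [if_neg (show ¬ρ1 i ≠ ρ1 1 from fun h => h hr1),
        if_neg (show ¬ρ2 i ≠ ρ2 1 from fun h => h hr2)]
    exact ih uf1b uf2b ⟨l1b.trans (l1a.trans hl1), d1, h1b⟩ ⟨l2b.trans (l2a.trans hl2), d2, h2b⟩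
      (fun x hx => hmem x (List.mem_cons_of_mem i hx))
      (fun x hx => hconn x (List.mem_cons_of_mem i hx)) res

theorem verifyA_fail {n : Int} (hn : 1 ≤ n) {ρ1 ρ2 : Int → Int} :
    ∀ (is : List Int) (uf1 uf2 : List Int), Dsu (n + 1).toNat uf1 ρ1 →
      Dsu (n + 1).toNat uf2 ρ2 → (∀ i ∈ is, InR (n + 1) i) →
      (∃ i ∈ is, ρ1 i ≠ ρ1 1 ∨ ρ2 i ≠ ρ2 1) → ∀ res, verifyA is uf1 uf2 res = -1 := by
  intro is
  induction is with
  | nil => intro uf1 uf2 _ _ _ hex; exact absurd hex (by simp)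
  | cons i is ih =>
    intro uf1 uf2 hd1 hd2 hmem hex res
    obtain ⟨hl1, d1, habs1⟩ := hd1
    obtain ⟨hl2, d2, habs2⟩ := hd2
    have hiin := hmem i List.mem_cons_self
    have h1in : InR (n + 1) 1 := ⟨le_refl 1, by omega⟩
    obtain ⟨uf1a, e1a, l1a, h1a⟩ := findA_spec habs1 (inR_shift hn hl1 hiin)
    obtain ⟨uf1b, e1b, l1b, h1b⟩ := findA_spec h1a (inR_shift hn (l1a.trans hl1) h1in)
    obtain ⟨uf2a, e2a, l2a, h2a⟩ := findA_spec habs2 (inR_shift hn hl2 hiin)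
    obtain ⟨uf2b, e2b, l2b, h2b⟩ := findA_spec h2a (inR_shift hn (l2a.trans hl2) h1in)
    simp only [verifyA, e1a, e1b, e2a, e2b]
    by_cases hr1 : ρ1 i = ρ1 1
    · rw [if_neg (show ¬ρ1 i ≠ ρ1 1 from fun h => h hr1)]
      by_cases hr2 : ρ2 i = ρ2 1
      · rw [if_neg (show ¬ρ2 i ≠ ρ2 1 from fun h => h hr2)]
        apply ih uf1b uf2b ⟨l1b.trans (l1a.trans hl1), d1, h1b⟩
          ⟨l2b.trans (l2a.trans hl2), d2, h2b⟩
          (fun x hx => hmem x (List.mem_cons_of_mem i hx))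
        obtain ⟨j, hj, hjne⟩ := hex
        rcases List.mem_cons.mp hj with hji | hjtail
        · subst hji; tauto
        · exact ⟨j, hjtail, hjne⟩
      · rw [if_pos hr2]
    · rw [if_pos hr1]

theorem dsu_closure {n : Int} (hn : 1 ≤ n) {uf : List Int} {ρ : Int → Int}
    (hd : Dsu (n + 1).toNat uf ρ) :
    ∀ i, InR (n + 1) i → InR (n + 1) (ρ i) ∧ ρ (ρ i) = ρ i := by
  obtain ⟨hlen, d, habs⟩ := hd
  intro i hi
  exact ⟨inR_unshift hn hlen (absd_rho_inR habs (inR_shift hn hlen hi)),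
    absd_rho_idem habs (inR_shift hn hlen hi)⟩

theorem roots_nonempty {n : Int} (hn : 1 ≤ n) {ρ : Int → Int}
    (hcl : ∀ i, InR (n + 1) i → InR (n + 1) (ρ i) ∧ ρ (ρ i) = ρ i) :
    0 < (rootsOf n ρ).card := by
  have h1 : InR (n + 1) 1 := ⟨le_refl 1, by omega⟩
  obtain ⟨hin, hidem⟩ := hcl 1 h1
  exact Finset.card_pos.mpr ⟨ρ 1, mem_rootsOf hin.1 (by have := hin.2; omega) hidem⟩

theorem allconn_of_card_le_one {n : Int} (hn : 1 ≤ n) {ρ : Int → Int}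
    (hcl : ∀ i, InR (n + 1) i → InR (n + 1) (ρ i) ∧ ρ (ρ i) = ρ i)
    (hcard : (rootsOf n ρ).card ≤ 1) : ∀ i, InR (n + 1) i → ρ i = ρ 1 := by
  intro i hi
  have h1 : InR (n + 1) 1 := ⟨le_refl 1, by omega⟩
  obtain ⟨hin_i, hid_i⟩ := hcl i hi
  obtain ⟨hin_1, hid_1⟩ := hcl 1 h1
  have hmi : ρ i ∈ rootsOf n ρ := mem_rootsOf hin_i.1 (by have := hin_i.2; omega) hid_i
  have hm1 : ρ 1 ∈ rootsOf n ρ := mem_rootsOf hin_1.1 (by have := hin_1.2; omega) hid_1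
  by_contra hne
  have : 1 < (rootsOf n ρ).card := Finset.one_lt_card.mpr ⟨ρ i, hmi, ρ 1, hm1, hne⟩
  omega

theorem exists_disconn_of_one_lt_card {n : Int} (hn : 1 ≤ n) {ρ : Int → Int}
    (hcard : 1 < (rootsOf n ρ).card) : ∃ i, InR (n + 1) i ∧ ρ i ≠ ρ 1 := by
  obtain ⟨a, ha, b, hb, hab⟩ := Finset.one_lt_card.mp hcard
  obtain ⟨r, hr, hrne⟩ : ∃ r ∈ rootsOf n ρ, r ≠ ρ 1 := by
    by_cases h : a = ρ 1
    · exact ⟨b, hb, by rw [← h]; exact fun hh => hab hh.symm⟩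
    · exact ⟨a, ha, h⟩
  simp only [rootsOf, Finset.mem_filter, Finset.mem_Icc] at hr
  exact ⟨r, ⟨hr.1.1, by have := hr.1.2; omega⟩, by rw [hr.2]; exact hrne⟩

theorem init_dsu {n : Int} (hn : 1 ≤ n) :
    Dsu (n + 1).toNat (PySem.List.pyRange 0 (n + 1) 1) (fun i => i) := by
  have hlen : (PySem.List.pyRange 0 (n + 1) 1).length = (n + 1).toNat := by
    rw [PySem.List.length_pyRange_one]; norm_num
  have hprnt : ∀ i, InR (((PySem.List.pyRange 0 (n + 1) 1).length : Int)) i →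
      prnt (PySem.List.pyRange 0 (n + 1) 1) i = i := by
    intro i hi
    unfold prnt
    rw [PySem.List.pyGetD_eq_getElem _ 0 (by have := hi.1; omega) hi.2]
    rw [PySem.List.getElem_pyRange_one]
    have : 0 ≤ i := by have := hi.1; omega
    omega
  refine ⟨hlen, fun _ => 0, ?_, ?_, ?_⟩
  · intro i hi; rw [hprnt i hi]; exact hi
  · intro i hi; exact Reaches.root (hprnt i hi)
  · intro i hi hne; exact absurd (hprnt i hi) hne

theorem rootsOf_id (n : Int) : (rootsOf n (fun i => i)).card = n.toNat := by
  unfold rootsOf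
  rw [Finset.filter_true_of_mem (fun _ _ => rfl), Int.card_Icc]
  norm_num


-- ---------- connectivity generated by a list of (normalised) node pairs ----------

def ERel (P : List (Int × Int)) (x y : Int) : Prop := (x, y) ∈ P ∨ (y, x) ∈ P

def Conn (P : List (Int × Int)) : Int → Int → Prop := Relation.ReflTransGen (ERel P)

theorem erel_symm {P : List (Int × Int)} {x y : Int} (h : ERel P x y) : ERel P y x := h.symm

theorem conn_symm {P : List (Int × Int)} {x y : Int} (h : Conn P x y) : Conn P y x :=
  Relation.ReflTransGen.symmetric (fun _ _ h => erel_symm h) h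

theorem conn_mem_mono {P Q : List (Int × Int)} (hPQ : ∀ p, p ∈ P → p ∈ Q) {x y : Int}
    (h : Conn P x y) : Conn Q x y :=
  Relation.ReflTransGen.mono (fun _ _ hr => hr.imp (hPQ _) (hPQ _)) h

theorem conn_congr {P Q : List (Int × Int)} (hPQ : ∀ p, p ∈ P ↔ p ∈ Q) {x y : Int} :
    Conn P x y ↔ Conn Q x y :=
  ⟨conn_mem_mono (fun p hp => (hPQ p).mp hp), conn_mem_mono (fun p hp => (hPQ p).mpr hp)⟩

theorem conn_nil {x y : Int} : Conn [] x y ↔ x = y := by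
  constructor
  · intro h
    induction h with
    | refl => rfl
    | tail _ he ih => rcases he with h | h <;> simp at h
  · rintro rfl; exact Relation.ReflTransGen.refl

theorem conn_snoc {P : List (Int × Int)} {u v x y : Int} :
    Conn (P ++ [(u, v)]) x y ↔
      Conn P x y ∨ (Conn P x u ∧ Conn P v y) ∨ (Conn P x v ∧ Conn P u y) := by
  constructor
  · intro h
    induction h with
    | refl => exact Or.inl Relation.ReflTransGen.refl
    | @tail m z hxm he ih =>
      have he' : ERel P m z ∨ (m = u ∧ z = v) ∨ (m = v ∧ z = u) := by
        rcases he with h | h <;> rcases List.mem_append.mp h with h' | h'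
        · exact Or.inl (Or.inl h')
        · simp at h'; exact Or.inr (Or.inl ⟨h'.1, h'.2⟩)
        · exact Or.inl (Or.inr h')
        · simp at h'; exact Or.inr (Or.inr ⟨h'.2, h'.1⟩)
      rcases he' with he' | ⟨rfl, rfl⟩ | ⟨rfl, rfl⟩
      · rcases ih with ih | ⟨h1, h2⟩ | ⟨h1, h2⟩
        · exact Or.inl (ih.tail he')
        · exact Or.inr (Or.inl ⟨h1, h2.tail he'⟩)
        · exact Or.inr (Or.inr ⟨h1, h2.tail he'⟩)
      · rcases ih with ih | ⟨h1, h2⟩ | ⟨h1, h2⟩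
        · exact Or.inr (Or.inl ⟨ih, Relation.ReflTransGen.refl⟩)
        · exact Or.inr (Or.inl ⟨h1, Relation.ReflTransGen.refl⟩)
        · exact Or.inl h1
      · rcases ih with ih | ⟨h1, h2⟩ | ⟨h1, h2⟩
        · exact Or.inr (Or.inr ⟨ih, Relation.ReflTransGen.refl⟩)
        · exact Or.inl h1
        · exact Or.inl (h1.trans (conn_symm h2))
  · have hstep : Conn (P ++ [(u, v)]) u v :=
      Relation.ReflTransGen.single (Or.inl (by simp))
    have hmono : ∀ {a b : Int}, Conn P a b → Conn (P ++ [(u, v)]) a b :=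
      fun h => conn_mem_mono (fun p hp => List.mem_append_left _ hp) h
    rintro (h | ⟨h1, h2⟩ | ⟨h1, h2⟩)
    · exact hmono h
    · exact ((hmono h1).trans hstep).trans (hmono h2)
    · exact ((hmono h1).trans (conn_symm hstep)).trans (hmono h2)

-- every pair in P names two real nodes
def Pok (n : Int) (P : List (Int × Int)) : Prop :=
  ∀ p ∈ P, InR (n + 1) p.1 ∧ InR (n + 1) p.2

theorem erel_inR {n : Int} {P : List (Int × Int)} (hP : Pok n P) {x y : Int}
    (h : ERel P x y) : InR (n + 1) x ∧ InR (n + 1) y := by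
  rcases h with h | h
  · exact hP _ h
  · exact (hP _ h).symm

-- ρ realises exactly the connectivity of P on the nodes 1..n
def PC (n : Int) (ρ : Int → Int) (P : List (Int × Int)) : Prop :=
  ∀ x y, InR (n + 1) x → InR (n + 1) y → (ρ x = ρ y ↔ Conn P x y)

theorem pc_congr {n : Int} {ρ : Int → Int} {P Q : List (Int × Int)}
    (hPQ : ∀ p, p ∈ P ↔ p ∈ Q) (h : PC n ρ P) : PC n ρ Q := by
  intro x y hx hy
  rw [h x y hx hy]
  exact conn_congr hPQ

theorem pc_eq_snoc {n : Int} {ρ : Int → Int} {P : List (Int × Int)} (hpc : PC n ρ P)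
    {u v : Int} (hu : InR (n + 1) u) (hv : InR (n + 1) v) (huv : ρ u = ρ v) :
    PC n ρ (P ++ [(u, v)]) := by
  intro x y hx hy
  rw [hpc x y hx hy, conn_snoc]
  have hc : Conn P u v := (hpc u v hu hv).mp huv
  constructor
  · exact Or.inl
  · rintro (h | ⟨h1, h2⟩ | ⟨h1, h2⟩)
    · exact h
    · exact (h1.trans hc).trans h2
    · exact (h1.trans (conn_symm hc)).trans h2

theorem pc_merge_snoc {n : Int} {ρ : Int → Int} {P : List (Int × Int)} (hpc : PC n ρ P)
    {u v a b : Int} (hu : InR (n + 1) u) (hv : InR (n + 1) v) (huv : ρ u ≠ ρ v)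
    (hdir : (a, b) = (ρ u, ρ v) ∨ (a, b) = (ρ v, ρ u)) :
    PC n (mergeFn ρ a b) (P ++ [(u, v)]) := by
  have hab : a ≠ b := by
    rcases hdir with h | h <;> injection h with h1 h2 <;> subst h1 <;> subst h2 <;> omega
  intro x y hx hy
  rw [mergeFn_eq_iff hab, conn_snoc, ← hpc x y hx hy, ← hpc x u hx hu, ← hpc x v hx hv]
  rw [show Conn P v y ↔ ρ y = ρ v from
        Iff.trans (Iff.symm (hpc v y hv hy)) (by constructor <;> omega),
      show Conn P u y ↔ ρ y = ρ u from
        Iff.trans (Iff.symm (hpc u y hu hy)) (by constructor <;> omega)]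
  rcases hdir with h | h <;> injection h with h1 h2 <;> subst h1 <;> subst h2 <;>
    constructor <;> intro h <;> omega

-- one Python union call, specified against the pair list it processes
theorem unionA_pc {n : Int} (hn : 1 ≤ n) {uf : List Int} {ρ : Int → Int}
    {P : List (Int × Int)} (rank : List Int) (hd : Dsu (n + 1).toNat uf ρ) (hpc : PC n ρ P)
    {u v : Int} (hu : LabOK n u) (hv : LabOK n v) :
    ∃ uf' rank' ρ' bit, unionA uf rank u v = (uf', rank', bit) ∧
      Dsu (n + 1).toNat uf' ρ' ∧
      PC n ρ' (P ++ [(nrmI (n + 1) u, nrmI (n + 1) v)]) ∧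
      ((Conn P (nrmI (n + 1) u) (nrmI (n + 1) v) ∧ bit = 0 ∧
          rootsOf n ρ' = rootsOf n ρ) ∨
       (¬ Conn P (nrmI (n + 1) u) (nrmI (n + 1) v) ∧ bit = 1 ∧
          (rootsOf n ρ').card + 1 = (rootsOf n ρ).card)) := by
  obtain ⟨hnu1, hnu2, hwu⟩ := nrmI_bounds hn hu
  obtain ⟨hnv1, hnv2, hwv⟩ := nrmI_bounds hn hv
  obtain ⟨hlen, d, habs⟩ := hd
  have hL : (uf.length : Int) = n + 1 := by rw [hlen]; omega
  have huIn : InR ((uf.length : Int)) (nrmI (n + 1) u) := by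
    rw [hL]; exact ⟨hnu1, by omega⟩
  have hvIn : InR ((uf.length : Int)) (nrmI (n + 1) v) := by
    rw [hL]; exact ⟨hnv1, by omega⟩
  have huInn : InR (n + 1) (nrmI (n + 1) u) := ⟨hnu1, by omega⟩
  have hvInn : InR (n + 1) (nrmI (n + 1) v) := ⟨hnv1, by omega⟩
  have hw : unionA uf rank u v = unionA uf rank (nrmI (n + 1) u) (nrmI (n + 1) v) := by
    have := unionA_wrap habs rank (u := u) (v := v) (by omega) (by omega)
      (by rw [hL]; exact huInn) (by rw [hL]; exact hvInn)
    rwa [hL] at this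
  rw [hw]
  by_cases hq : ρ (nrmI (n + 1) u) = ρ (nrmI (n + 1) v)
  · obtain ⟨uf', he, hl, habs'⟩ := unionA_spec_eq habs rank huIn hvIn hq
    exact ⟨uf', rank, ρ, 0, he, ⟨hl.trans hlen, d, habs'⟩,
      pc_eq_snoc hpc huInn hvInn hq,
      Or.inl ⟨(hpc _ _ huInn hvInn).mp hq, rfl, rfl⟩⟩
  · obtain ⟨uf', rank', d', a, b, he, hl, hdir, habs'⟩ := unionA_spec_ne habs rank huIn hvIn hq
    have hpc' := pc_merge_snoc hpc huInn hvInn hq hdir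
    have hau := absd_rho_idem habs huIn
    have hav := absd_rho_idem habs hvIn
    have hrootu : ρ (nrmI (n + 1) u) ∈ rootsOf n ρ :=
      mem_rootsOf (absd_rho_inR habs huIn).1
        (by have := (absd_rho_inR habs huIn).2; omega) hau
    have hrootv : ρ (nrmI (n + 1) v) ∈ rootsOf n ρ :=
      mem_rootsOf (absd_rho_inR habs hvIn).1
        (by have := (absd_rho_inR habs hvIn).2; omega) hav
    have hcard : (rootsOf n (mergeFn ρ a b)).card + 1 = (rootsOf n ρ).card := by
      rcases hdir with h | h <;> injection h with h1 h2 <;> subst h1 <;> subst h2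
      · rw [rootsOf_merge hau hav hq, Finset.card_erase_of_mem hrootv]
        have := Finset.card_pos.mpr ⟨_, hrootv⟩
        omega
      · rw [rootsOf_merge hav hau (fun h => hq h.symm), Finset.card_erase_of_mem hrootu]
        have := Finset.card_pos.mpr ⟨_, hrootu⟩
        omega
    exact ⟨uf', rank', mergeFn ρ a b, 1, he, ⟨hl.trans hlen, d', habs'⟩, hpc',
      Or.inr ⟨fun hc => hq ((hpc _ _ huInn hvInn).mpr hc), rfl, hcard⟩⟩

-- ---------- the normalised pairs a list of edges contributes to a graph ----------

def pairsOf (n : Int) (ts : List Int) (e : List Int) : List (Int × Int) :=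
  match e with
  | [t, u, v] => if t ∈ ts then [(nrmI (n + 1) u, nrmI (n + 1) v)] else []
  | _ => []

def allPairs (n : Int) (ts : List Int) (edges : List (List Int)) : List (Int × Int) :=
  edges.flatMap (pairsOf n ts)

theorem pok_pairsOf {n : Int} (hn : 1 ≤ n) {ts : List Int}
    (hts : ∀ t ∈ ts, t = 1 ∨ t = 2 ∨ t = 3) {e : List Int} (hok : pvEdgeOK n e = true) :
    Pok n (pairsOf n ts e) := by
  rcases e with _ | ⟨t, _ | ⟨u, _ | ⟨v, _ | ⟨w, e4⟩⟩⟩⟩ <;> try simp [pvEdgeOK] at hok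
  intro p hp
  simp only [pairsOf] at hp
  by_cases ht : t ∈ ts
  · rw [if_pos ht] at hp
    simp at hp
    subst hp
    have ht' := hts t ht
    have hlab : pvLabelOK n u = true ∧ pvLabelOK n v = true := by
      rcases hok with h | h
      · omega
      · exact ⟨h.1, h.2⟩
    obtain ⟨h1, h2, _⟩ := nrmI_bounds hn (labOK_of_pv hlab.1)
    obtain ⟨h3, h4, _⟩ := nrmI_bounds hn (labOK_of_pv hlab.2)
    exact ⟨⟨h1, by omega⟩, ⟨h3, by omega⟩⟩
  · rw [if_neg ht] at hp
    simp at hp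

theorem pok_allPairs {n : Int} (hn : 1 ≤ n) {ts : List Int}
    (hts : ∀ t ∈ ts, t = 1 ∨ t = 2 ∨ t = 3) {edges : List (List Int)}
    (hall : ∀ e ∈ edges, pvEdgeOK n e = true) : Pok n (allPairs n ts edges) := by
  intro p hp
  simp only [allPairs, List.mem_flatMap] at hp
  obtain ⟨e, he, hpe⟩ := hp
  exact pok_pairsOf hn hts (hall e he) p hpe

theorem allPairs_cons (n : Int) (ts : List Int) (e : List Int) (edges : List (List Int)) :
    allPairs n ts (e :: edges) = pairsOf n ts e ++ allPairs n ts edges := by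
  simp [allPairs]

-- membership view: the pairs of one edge for the union of two type sets
theorem mem_allPairs_union {n : Int} {j : Int} (hj : j ≠ 3) (edges : List (List Int)) :
    ∀ p, p ∈ allPairs n [3] edges ++ allPairs n [j] edges ↔ p ∈ allPairs n [3, j] edges := by
  intro p
  simp only [List.mem_append, allPairs, List.mem_flatMap]
  rw [← exists_or]
  apply exists_congr
  intro e
  rw [← and_or_left]
  apply and_congr_right
  intro _
  rcases e with _ | ⟨t, _ | ⟨u, _ | ⟨v, _ | ⟨w, e4⟩⟩⟩⟩ <;> simp only [pairsOf] <;> try simp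
  all_goals tauto

-- ---------- phase-1 invariant: A's state after processing the type-3 pairs P ----------

def Good1 (n : Int) (sa : List Int × List Int × List Int × List Int × Int)
    (P : List (Int × Int)) : Prop :=
  ∃ ρ1 ρ2, Dsu (n + 1).toNat sa.1 ρ1 ∧ Dsu (n + 1).toNat sa.2.2.1 ρ2 ∧
    PC n ρ1 P ∧ PC n ρ2 P ∧
    (rootsOf n ρ1).card = (rootsOf n ρ2).card ∧
    sa.2.2.2.2 = n - ((rootsOf n ρ1).card : Int)

theorem good1_step {n : Int} (hn : 1 ≤ n) {sa} {P : List (Int × Int)} {e : List Int}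
    (hok : pvEdgeOK n e = true) (hg : Good1 n sa P) :
    Good1 n (step1A sa e) (P ++ pairsOf n [3] e) := by
  obtain ⟨uf1, rank1, uf2, rank2, req⟩ := sa
  rcases e with _ | ⟨t, _ | ⟨u, _ | ⟨v, _ | ⟨w, e4⟩⟩⟩⟩ <;> try simp [pvEdgeOK] at hok
  obtain ⟨ρ1, ρ2, hd1, hd2, hpc1, hpc2, hcc, hreq⟩ := hg
  simp only at hd1 hd2 hpc1 hpc2 hcc hreq
  by_cases ht : t = 3
  · have hlab : pvLabelOK n u = true ∧ pvLabelOK n v = true := by tauto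
    have hLu : LabOK n u := labOK_of_pv hlab.1
    have hLv : LabOK n v := labOK_of_pv hlab.2
    obtain ⟨uf1', rank1', ρ1', bit1, he1, hd1', hpc1', hv1⟩ :=
      unionA_pc hn rank1 hd1 hpc1 hLu hLv
    obtain ⟨uf2', rank2', ρ2', bit2, he2, hd2', hpc2', hv2⟩ :=
      unionA_pc hn rank2 hd2 hpc2 hLu hLv
    have hps : pairsOf n [3] [t, u, v] = [(nrmI (n + 1) u, nrmI (n + 1) v)] := by
      simp [pairsOf, ht]
    rw [hps]
    simp only [step1A, if_pos ht, he1, he2]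
    have hcase : ((rootsOf n ρ1').card = (rootsOf n ρ1).card ∧
        (rootsOf n ρ2').card = (rootsOf n ρ2).card ∧ bit1 = 0 ∧ bit2 = 0) ∨
        ((rootsOf n ρ1').card + 1 = (rootsOf n ρ1).card ∧
        (rootsOf n ρ2').card + 1 = (rootsOf n ρ2).card ∧ bit1 = 1 ∧ bit2 = 1) := by
      rcases hv1 with ⟨hc1, hb1, hr1⟩ | ⟨hc1, hb1, hr1⟩ <;>
        rcases hv2 with ⟨hc2, hb2, hr2⟩ | ⟨hc2, hb2, hr2⟩
      · exact Or.inl ⟨by rw [hr1], by rw [hr2], hb1, hb2⟩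
      · exact absurd hc1 hc2
      · exact absurd hc2 hc1
      · exact Or.inr ⟨hr1, hr2, hb1, hb2⟩
    refine ⟨ρ1', ρ2', hd1', hd2', hpc1', hpc2', ?_, ?_⟩
    · rcases hcase with ⟨a, b, _, _⟩ | ⟨a, b, _, _⟩ <;> omega
    · rcases hcase with ⟨a, b, c, d⟩ | ⟨a, b, c, d⟩ <;> subst c <;> subst d <;>
        norm_num <;> omega
  · have hps : pairsOf n [3] [t, u, v] = [] := by
      simp [pairsOf, ht]
    rw [hps, List.append_nil]
    simp only [step1A, if_neg ht]
    exact ⟨ρ1, ρ2, hd1, hd2, hpc1, hpc2, hcc, hreq⟩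

theorem good1_fold {n : Int} (hn : 1 ≤ n) :
    ∀ (edges : List (List Int)) sa P, (∀ e ∈ edges, pvEdgeOK n e = true) → Good1 n sa P →
      Good1 n (edges.foldl step1A sa) (P ++ allPairs n [3] edges) := by
  intro edges
  induction edges with
  | nil => intro sa P _ hg; simpa [allPairs] using hg
  | cons e es ih =>
    intro sa P hall hg
    rw [allPairs_cons, ← List.append_assoc]
    exact ih _ _ (fun x hx => hall x (List.mem_cons_of_mem e hx))
      (good1_step hn (hall e List.mem_cons_self) hg)

-- ---------- phase-2 invariant (K3 = class count after the type-3 pass, a constant) ----------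

def Good2 (n : Int) (K3 : Nat) (P3 : List (Int × Int))
    (sa : List Int × List Int × List Int × List Int × Int)
    (P1 P2 : List (Int × Int)) : Prop :=
  ∃ ρ1 ρ2, Dsu (n + 1).toNat sa.1 ρ1 ∧ Dsu (n + 1).toNat sa.2.2.1 ρ2 ∧
    PC n ρ1 (P3 ++ P1) ∧ PC n ρ2 (P3 ++ P2) ∧
    (rootsOf n ρ1).card ≤ K3 ∧ (rootsOf n ρ2).card ≤ K3 ∧
    sa.2.2.2.2 = (n - ((rootsOf n ρ1).card : Int)) + (n - ((rootsOf n ρ2).card : Int))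
      - (n - (K3 : Int))

theorem good2_step {n : Int} (hn : 1 ≤ n) {K3 P3 sa P1 P2} {e : List Int}
    (hok : pvEdgeOK n e = true) (hg : Good2 n K3 P3 sa P1 P2) :
    Good2 n K3 P3 (step2A sa e) (P1 ++ pairsOf n [1] e) (P2 ++ pairsOf n [2] e) := by
  obtain ⟨uf1, rank1, uf2, rank2, req⟩ := sa
  rcases e with _ | ⟨t, _ | ⟨u, _ | ⟨v, _ | ⟨w, e4⟩⟩⟩⟩ <;> try simp [pvEdgeOK] at hok
  obtain ⟨ρ1, ρ2, hd1, hd2, hpc1, hpc2, hk1, hk2, hreq⟩ := hg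
  simp only at hd1 hd2 hpc1 hpc2 hk1 hk2 hreq
  by_cases ht1 : t = 1
  · have ht2 : ¬ t = 2 := by omega
    have hlab : pvLabelOK n u = true ∧ pvLabelOK n v = true := by tauto
    obtain ⟨uf1', rank1', ρ1', bit1, he1, hd1', hpc1', hv1⟩ :=
      unionA_pc hn rank1 hd1 hpc1 (labOK_of_pv hlab.1) (labOK_of_pv hlab.2)
    have hp1 : pairsOf n [1] [t, u, v] = [(nrmI (n + 1) u, nrmI (n + 1) v)] := by
      simp [pairsOf, ht1]
    have hp2 : pairsOf n [2] [t, u, v] = [] := by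
      simp [pairsOf]; omega
    rw [hp1, hp2, List.append_nil]
    simp only [step2A, if_pos ht1, if_neg ht2, he1]
    rw [List.append_assoc] at hpc1'
    have hcase : ((rootsOf n ρ1').card = (rootsOf n ρ1).card ∧ bit1 = 0) ∨
        ((rootsOf n ρ1').card + 1 = (rootsOf n ρ1).card ∧ bit1 = 1) := by
      rcases hv1 with ⟨hc1, hb1, hr1⟩ | ⟨hc1, hb1, hr1⟩
      · exact Or.inl ⟨by rw [hr1], hb1⟩
      · exact Or.inr ⟨hr1, hb1⟩
    refine ⟨ρ1', ρ2, hd1', hd2, hpc1', hpc2, ?_, hk2, ?_⟩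
    · rcases hcase with ⟨a, _⟩ | ⟨a, _⟩ <;> omega
    · rcases hcase with ⟨a, c⟩ | ⟨a, c⟩ <;> subst c <;>
        norm_num <;> omega
  · by_cases ht2 : t = 2
    · have hlab : pvLabelOK n u = true ∧ pvLabelOK n v = true := by tauto
      obtain ⟨uf2', rank2', ρ2', bit2, he2, hd2', hpc2', hv2⟩ :=
        unionA_pc hn rank2 hd2 hpc2 (labOK_of_pv hlab.1) (labOK_of_pv hlab.2)
      have hp1 : pairsOf n [1] [t, u, v] = [] := by
        simp [pairsOf]; omega
      have hp2 : pairsOf n [2] [t, u, v] = [(nrmI (n + 1) u, nrmI (n + 1) v)] := by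
        simp [pairsOf, ht2]
      rw [hp1, hp2, List.append_nil]
      simp only [step2A, if_pos ht2, if_neg ht1, he2]
      rw [List.append_assoc] at hpc2'
      have hcase : ((rootsOf n ρ2').card = (rootsOf n ρ2).card ∧ bit2 = 0) ∨
          ((rootsOf n ρ2').card + 1 = (rootsOf n ρ2).card ∧ bit2 = 1) := by
        rcases hv2 with ⟨hc2, hb2, hr2⟩ | ⟨hc2, hb2, hr2⟩
        · exact Or.inl ⟨by rw [hr2], hb2⟩
        · exact Or.inr ⟨hr2, hb2⟩
      refine ⟨ρ1, ρ2', hd1, hd2', hpc1, hpc2', hk1, ?_, ?_⟩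
      · rcases hcase with ⟨a, _⟩ | ⟨a, _⟩ <;> omega
      · rcases hcase with ⟨a, c⟩ | ⟨a, c⟩ <;> subst c <;>
          norm_num <;> omega
    · have hp1 : pairsOf n [1] [t, u, v] = [] := by
        simp [pairsOf]; omega
      have hp2 : pairsOf n [2] [t, u, v] = [] := by
        simp [pairsOf]; omega
      rw [hp1, hp2, List.append_nil, List.append_nil]
      simp only [step2A, if_neg ht1, if_neg ht2]
      exact ⟨ρ1, ρ2, hd1, hd2, hpc1, hpc2, hk1, hk2, hreq⟩

theorem good2_fold {n : Int} (hn : 1 ≤ n) {K3 P3} :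
    ∀ (edges : List (List Int)) sa P1 P2, (∀ e ∈ edges, pvEdgeOK n e = true) →
      Good2 n K3 P3 sa P1 P2 →
      Good2 n K3 P3 (edges.foldl step2A sa) (P1 ++ allPairs n [1] edges)
        (P2 ++ allPairs n [2] edges) := by
  intro edges
  induction edges with
  | nil => intro sa P1 P2 _ hg; simpa [allPairs] using hg
  | cons e es ih =>
    intro sa P1 P2 hall hg
    rw [allPairs_cons, allPairs_cons, ← List.append_assoc, ← List.append_assoc]
    exact ih _ _ _ (fun x hx => hall x (List.mem_cons_of_mem e hx))
      (good2_step hn (hall e List.mem_cons_self) hg)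

-- ---------- B's adjacency lists realise exactly the pair list of the processed edges ----------

theorem erel_snoc {P : List (Int × Int)} {u v x y : Int} :
    ERel (P ++ [(u, v)]) x y ↔ ERel P x y ∨ (x = u ∧ y = v) ∨ (x = v ∧ y = u) := by
  simp only [ERel, List.mem_append, List.mem_singleton, Prod.mk.injEq]
  tauto

-- Python list access at a legal label equals access at its normalised index
theorem pyGetD_lab_wrap {α : Type} (xs : List α) (d : α) {n z : Int} (hn : 1 ≤ n)
    (hlen : xs.length = (n + 1).toNat) (hz : LabOK n z) :
    PySem.List.pyGetD xs z d = PySem.List.pyGetD xs (nrmI (n + 1) z) d := by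
  have hL : (xs.length : Int) = n + 1 := by rw [hlen]; omega
  unfold nrmI
  by_cases h : z < 0
  · rw [if_pos h, pyGetD_wrap xs d z (by rw [hL]; rcases hz with h' | h' <;> omega) h, hL]
  · rw [if_neg h]

theorem pySetD_lab_wrap {α : Type} (xs : List α) (v : α) {n z : Int} (hn : 1 ≤ n)
    (hlen : xs.length = (n + 1).toNat) (hz : LabOK n z) :
    PySem.List.pySetD xs z v = PySem.List.pySetD xs (nrmI (n + 1) z) v := by
  have hL : (xs.length : Int) = n + 1 := by rw [hlen]; omega
  unfold nrmI
  by_cases h : z < 0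
  · rw [if_pos h, pySetD_wrap xs v z (by rw [hL]; rcases hz with h' | h' <;> omega) h, hL]
  · rw [if_neg h]

theorem nrmI_self {n z : Int} (hz : 0 ≤ z) : nrmI n z = z := by
  unfold nrmI; rw [if_neg (by omega)]

theorem labOK_nrmI {n z : Int} (hn : 1 ≤ n) (hz : LabOK n z) :
    LabOK n (nrmI (n + 1) z) ∧ InR (n + 1) (nrmI (n + 1) z) := by
  obtain ⟨h1, h2, _⟩ := nrmI_bounds hn hz
  exact ⟨Or.inl ⟨h1, h2⟩, ⟨h1, by omega⟩⟩

def AdjInv (n : Int) (g : List (List Int)) (P : List (Int × Int)) : Prop :=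
  g.length = (n + 1).toNat ∧
  (∀ x, InR (n + 1) x → ∀ z ∈ PySem.List.pyGetD g x [], LabOK n z) ∧
  (∀ x y, InR (n + 1) x →
    ((∃ z ∈ PySem.List.pyGetD g x [], nrmI (n + 1) z = y) ↔ ERel P x y))

theorem adjInv_init {n : Int} (hn : 1 ≤ n) :
    AdjInv n (List.replicate (n + 1).toNat []) [] := by
  have hget : ∀ x : Int, InR (n + 1) x →
      PySem.List.pyGetD (List.replicate (n + 1).toNat ([] : List Int)) x [] = [] := by
    intro x hx
    exact pyGetD_replicate _ _ _ x (by have := hx.1; omega) (by have := hx.2; omega)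
  refine ⟨List.length_replicate, ?_, ?_⟩
  · intro x hx z hz
    rw [hget x hx] at hz
    simp at hz
  · intro x y hx
    rw [hget x hx]
    simp [ERel]

theorem appendAdj_norm {n : Int} (hn : 1 ≤ n) (h : List (List Int))
    (hlen : h.length = (n + 1).toNat) {a : Int} (ha : LabOK n a) (b : Int) :
    appendAdj h a b = PySem.List.pySetD h (nrmI (n + 1) a)
      (PySem.List.pyGetD h (nrmI (n + 1) a) [] ++ [b]) := by
  unfold appendAdj
  rw [pyGetD_lab_wrap h [] hn hlen ha, pySetD_lab_wrap h _ hn hlen ha]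

theorem adjInv_addEdge {n : Int} (hn : 1 ≤ n) {g : List (List Int)} {P : List (Int × Int)}
    (hA : AdjInv n g P) {u v : Int} (hu : LabOK n u) (hv : LabOK n v) :
    AdjInv n (addEdgeB g u v) (P ++ [(nrmI (n + 1) u, nrmI (n + 1) v)]) := by
  obtain ⟨hlen, hwf, hrel⟩ := hA
  obtain ⟨hu', huIn⟩ := labOK_nrmI hn hu
  obtain ⟨hv', hvIn⟩ := labOK_nrmI hn hv
  have hbnd : ∀ (h : List (List Int)), h.length = (n + 1).toNat → ∀ x : Int, InR (n + 1) x →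
      0 ≤ x ∧ x < (h.length : Int) := by
    intro h hl x hx
    exact ⟨by have := hx.1; omega, by rw [hl]; have := hx.2; omega⟩
  have hg1eq := appendAdj_norm hn g hlen hu v
  have hlen1 : (appendAdj g u v).length = (n + 1).toNat := by
    rw [hg1eq, length_pySetD', hlen]
  have hget1 : ∀ x : Int, InR (n + 1) x → PySem.List.pyGetD (appendAdj g u v) x [] =
      if x = nrmI (n + 1) u then PySem.List.pyGetD g (nrmI (n + 1) u) [] ++ [v]
      else PySem.List.pyGetD g x [] := by
    intro x hx
    rw [hg1eq, pyGetD_pySetD g _ x _ [] (hbnd g hlen _ huIn).1 (hbnd g hlen x hx).1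
      (hbnd g hlen x hx).2]
  have hg2eq : addEdgeB g u v = PySem.List.pySetD (appendAdj g u v) (nrmI (n + 1) v)
      (PySem.List.pyGetD (appendAdj g u v) (nrmI (n + 1) v) [] ++ [u]) :=
    appendAdj_norm hn (appendAdj g u v) hlen1 hv u
  have hlen2 : (addEdgeB g u v).length = (n + 1).toNat := by
    rw [hg2eq, length_pySetD', hlen1]
  have hfin : ∀ x : Int, InR (n + 1) x → PySem.List.pyGetD (addEdgeB g u v) x [] =
      if x = nrmI (n + 1) v then
        (if nrmI (n + 1) v = nrmI (n + 1) u then PySem.List.pyGetD g (nrmI (n + 1) u) [] ++ [v]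
         else PySem.List.pyGetD g (nrmI (n + 1) v) []) ++ [u]
      else if x = nrmI (n + 1) u then PySem.List.pyGetD g (nrmI (n + 1) u) [] ++ [v]
      else PySem.List.pyGetD g x [] := by
    intro x hx
    rw [hg2eq, pyGetD_pySetD _ _ x _ [] (hbnd _ hlen1 _ hvIn).1 (hbnd _ hlen1 x hx).1
      (hbnd _ hlen1 x hx).2]
    by_cases hxv : x = nrmI (n + 1) v
    · rw [if_pos hxv, if_pos hxv, hget1 _ hvIn]
    · rw [if_neg hxv, if_neg hxv, hget1 _ hx]
  refine ⟨hlen2, ?_, ?_⟩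
  · intro x hx z hz
    rw [hfin x hx] at hz
    split_ifs at hz with hxv hvu hxu
    · simp only [List.mem_append, List.mem_singleton] at hz
      rcases hz with (hz | hz) | hz
      · exact hwf _ huIn z hz
      · subst hz; exact hv
      · subst hz; exact hu
    · simp only [List.mem_append, List.mem_singleton] at hz
      rcases hz with hz | hz
      · exact hwf _ hvIn z hz
      · subst hz; exact hu
    · simp only [List.mem_append, List.mem_singleton] at hz
      rcases hz with hz | hz
      · exact hwf _ huIn z hz
      · subst hz; exact hv
    · exact hwf x hx z hz
  · intro x y hx
    rw [erel_snoc, ← hrel x y hx, hfin x hx]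
    split_ifs with hxv hvu hxu
    · constructor
      · rintro ⟨z, hz, hnz⟩
        rcases List.mem_append.mp hz with hz' | hz'
        · rcases List.mem_append.mp hz' with h | h
          · exact Or.inl ⟨z, by rw [hxv, hvu]; exact h, hnz⟩
          · have hzv := List.mem_singleton.mp h; subst hzv
            exact Or.inr (Or.inr ⟨hxv, hnz.symm.trans hvu⟩)
        · have hzu := List.mem_singleton.mp hz'; subst hzu
          exact Or.inr (Or.inr ⟨hxv, hnz.symm⟩)
      · rintro (⟨z, hz, hnz⟩ | ⟨hxx, hyy⟩ | ⟨hxx, hyy⟩)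
        · refine ⟨z, ?_, hnz⟩
          apply List.mem_append_left
          apply List.mem_append_left
          rw [hxv, hvu] at hz
          exact hz
        · exact ⟨v, List.mem_append_left _ (List.mem_append_right _
            (List.mem_singleton.mpr rfl)), hyy.symm⟩
        · exact ⟨u, List.mem_append_right _ (List.mem_singleton.mpr rfl), hyy.symm⟩
    · constructor
      · rintro ⟨z, hz, hnz⟩
        rcases List.mem_append.mp hz with hz' | hz'
        · exact Or.inl ⟨z, by rw [hxv]; exact hz', hnz⟩
        · have hzu := List.mem_singleton.mp hz'; subst hzu
          exact Or.inr (Or.inr ⟨hxv, hnz.symm⟩)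
      · rintro (⟨z, hz, hnz⟩ | ⟨hxx, hyy⟩ | ⟨hxx, hyy⟩)
        · refine ⟨z, List.mem_append_left _ ?_, hnz⟩
          rw [hxv] at hz
          exact hz
        · exact absurd (hxv.symm.trans hxx) hvu
        · exact ⟨u, List.mem_append_right _ (List.mem_singleton.mpr rfl), hyy.symm⟩
    · constructor
      · rintro ⟨z, hz, hnz⟩
        rcases List.mem_append.mp hz with hz' | hz'
        · exact Or.inl ⟨z, by rw [hxu]; exact hz', hnz⟩
        · have hzv := List.mem_singleton.mp hz'; subst hzv
          exact Or.inr (Or.inl ⟨hxu, hnz.symm⟩)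
      · rintro (⟨z, hz, hnz⟩ | ⟨hxx, hyy⟩ | ⟨hxx, hyy⟩)
        · refine ⟨z, List.mem_append_left _ ?_, hnz⟩
          rw [hxu] at hz
          exact hz
        · exact ⟨v, List.mem_append_right _ (List.mem_singleton.mpr rfl), hyy.symm⟩
        · exact absurd hxx hxv
    · constructor
      · rintro ⟨z, hz, hnz⟩
        exact Or.inl ⟨z, hz, hnz⟩
      · rintro (⟨z, hz, hnz⟩ | ⟨hxx, hyy⟩ | ⟨hxx, hyy⟩)
        · exact ⟨z, hz, hnz⟩
        · exact absurd hxx hxu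
        · exact absurd hxx hxv

theorem adjInv_build_step {n : Int} (hn : 1 ≤ n)
    {s : List (List Int) × List (List Int) × List (List Int)}
    {P1 P2 P3 : List (Int × Int)} {e : List Int} (hok : pvEdgeOK n e = true)
    (h1 : AdjInv n s.1 P1) (h2 : AdjInv n s.2.1 P2) (h3 : AdjInv n s.2.2 P3) :
    AdjInv n (buildB s e).1 (P1 ++ pairsOf n [3, 1] e) ∧
    AdjInv n (buildB s e).2.1 (P2 ++ pairsOf n [3, 2] e) ∧
    AdjInv n (buildB s e).2.2 (P3 ++ pairsOf n [3] e) := by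
  obtain ⟨g1, g2, g3⟩ := s
  rcases e with _ | ⟨t, _ | ⟨u, _ | ⟨v, _ | ⟨w, e4⟩⟩⟩⟩ <;> try simp [pvEdgeOK] at hok
  simp only at h1 h2 h3
  simp only [buildB, PySem.List.pyGetD_zero_cons, pyGetD_cons1, pyGetD_cons2]
  by_cases ht3 : t = 3
  · have hlab : pvLabelOK n u = true ∧ pvLabelOK n v = true := by tauto
    have hLu := labOK_of_pv hlab.1
    have hLv := labOK_of_pv hlab.2
    rw [if_pos ht3]
    refine ⟨?_, ?_, ?_⟩ <;>
      rw [show pairsOf n _ [t, u, v] = [(nrmI (n + 1) u, nrmI (n + 1) v)] by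
            simp [pairsOf, ht3]] <;>
      exact adjInv_addEdge hn (by assumption) hLu hLv
  · rw [if_neg ht3]
    by_cases ht1 : t = 1
    · have hlab : pvLabelOK n u = true ∧ pvLabelOK n v = true := by tauto
      have hLu := labOK_of_pv hlab.1
      have hLv := labOK_of_pv hlab.2
      rw [if_pos ht1]
      refine ⟨?_, ?_, ?_⟩
      · rw [show pairsOf n [3, 1] [t, u, v] = [(nrmI (n + 1) u, nrmI (n + 1) v)] by
              simp [pairsOf, ht1]]
        exact adjInv_addEdge hn h1 hLu hLv
      · rw [show pairsOf n [3, 2] [t, u, v] = [] by simp [pairsOf]; omega, List.append_nil]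
        exact h2
      · rw [show pairsOf n [3] [t, u, v] = [] by simp [pairsOf]; omega, List.append_nil]
        exact h3
    · rw [if_neg ht1]
      by_cases ht2 : t = 2
      · have hlab : pvLabelOK n u = true ∧ pvLabelOK n v = true := by tauto
        have hLu := labOK_of_pv hlab.1
        have hLv := labOK_of_pv hlab.2
        rw [if_pos ht2]
        refine ⟨?_, ?_, ?_⟩
        · rw [show pairsOf n [3, 1] [t, u, v] = [] by simp [pairsOf]; omega, List.append_nil]
          exact h1
        · rw [show pairsOf n [3, 2] [t, u, v] = [(nrmI (n + 1) u, nrmI (n + 1) v)] by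
                simp [pairsOf, ht2]]
          exact adjInv_addEdge hn h2 hLu hLv
        · rw [show pairsOf n [3] [t, u, v] = [] by simp [pairsOf]; omega, List.append_nil]
          exact h3
      · rw [if_neg ht2]
        refine ⟨?_, ?_, ?_⟩
        · rw [show pairsOf n [3, 1] [t, u, v] = [] by simp [pairsOf]; omega, List.append_nil]
          exact h1
        · rw [show pairsOf n [3, 2] [t, u, v] = [] by simp [pairsOf]; omega, List.append_nil]
          exact h2
        · rw [show pairsOf n [3] [t, u, v] = [] by simp [pairsOf]; omega, List.append_nil]
          exact h3

theorem adjInv_build_fold {n : Int} (hn : 1 ≤ n) :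
    ∀ (edges : List (List Int)) s P1 P2 P3, (∀ e ∈ edges, pvEdgeOK n e = true) →
      AdjInv n s.1 P1 → AdjInv n s.2.1 P2 → AdjInv n s.2.2 P3 →
      AdjInv n (edges.foldl buildB s).1 (P1 ++ allPairs n [3, 1] edges) ∧
      AdjInv n (edges.foldl buildB s).2.1 (P2 ++ allPairs n [3, 2] edges) ∧
      AdjInv n (edges.foldl buildB s).2.2 (P3 ++ allPairs n [3] edges) := by
  intro edges
  induction edges with
  | nil => intro s P1 P2 P3 _ h1 h2 h3; simpa [allPairs] using ⟨h1, h2, h3⟩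
  | cons e es ih =>
    intro s P1 P2 P3 hall h1 h2 h3
    rw [allPairs_cons, allPairs_cons, allPairs_cons, ← List.append_assoc,
      ← List.append_assoc, ← List.append_assoc]
    obtain ⟨h1', h2', h3'⟩ := adjInv_build_step hn (hall e List.mem_cons_self) h1 h2 h3
    exact ih _ _ _ _ (fun x hx => hall x (List.mem_cons_of_mem e hx)) h1' h2' h3'

-- ---------- DFS component counting ----------

def VisP (visited : List Bool) (i : Int) : Prop :=
  PySem.List.pyGetD visited i false = true

-- the unvisited real nodes
noncomputable def unvis (n : Int) (visited : List Bool) : Nat :=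
  ((Finset.Icc (1 : Int) n).filter
    (fun i => PySem.List.pyGetD visited i false = false)).card

theorem notVis_iff {visited : List Bool} {i : Int} :
    PySem.List.pyGetD visited i false = false ↔ ¬ VisP visited i := by
  simp [VisP]

theorem visP_set {visited : List Bool} {j i : Int} (h0j : 0 ≤ j) (h0i : 0 ≤ i)
    (hi : i < (visited.length : Int)) :
    VisP (PySem.List.pySetD visited j true) i ↔ (i = j ∨ VisP visited i) := by
  unfold VisP
  rw [pyGetD_pySetD visited j i true false h0j h0i hi]
  by_cases h : i = j <;> simp [h]

theorem unvis_le {n : Int} (visited : List Bool) : unvis n visited ≤ n.toNat := by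
  unfold unvis
  calc ((Finset.Icc (1 : Int) n).filter _).card ≤ (Finset.Icc (1 : Int) n).card :=
        Finset.card_filter_le _ _
    _ = n.toNat := by rw [Int.card_Icc]; norm_num

theorem unvis_set {n : Int} {visited : List Bool} (hn : 1 ≤ n)
    (hlen : visited.length = (n + 1).toNat) {i : Int} (hi : InR (n + 1) i)
    (hnv : ¬ VisP visited i) :
    unvis n (PySem.List.pySetD visited i true) + 1 = unvis n visited := by
  have hbnd : ∀ j : Int, 1 ≤ j → j ≤ n → 0 ≤ j ∧ j < (visited.length : Int) := by
    intro j h1 h2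
    exact ⟨by omega, by rw [hlen]; omega⟩
  have hseteq : (Finset.Icc (1 : Int) n).filter
      (fun j => PySem.List.pyGetD (PySem.List.pySetD visited i true) j false = false) =
      ((Finset.Icc (1 : Int) n).filter
        (fun j => PySem.List.pyGetD visited j false = false)).erase i := by
    ext j
    simp only [Finset.mem_erase, Finset.mem_filter, Finset.mem_Icc, notVis_iff]
    constructor
    · intro ⟨hjc, hjv⟩
      rw [visP_set (hbnd i hi.1 (by have := hi.2; omega)).1 (hbnd j hjc.1 hjc.2).1
        (hbnd j hjc.1 hjc.2).2] at hjv
      rw [not_or] at hjv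
      exact ⟨hjv.1, hjc, hjv.2⟩
    · intro ⟨hji, hjc, hjv⟩
      refine ⟨hjc, ?_⟩
      rw [visP_set (hbnd i hi.1 (by have := hi.2; omega)).1 (hbnd j hjc.1 hjc.2).1
        (hbnd j hjc.1 hjc.2).2]
      rw [not_or]
      exact ⟨hji, hjv⟩
  unfold unvis
  rw [hseteq, Finset.card_erase_of_mem]
  · have hpos : 0 < ((Finset.Icc (1 : Int) n).filter
        (fun j => PySem.List.pyGetD visited j false = false)).card := by
      apply Finset.card_pos.mpr
      refine ⟨i, ?_⟩
      simp only [Finset.mem_filter, Finset.mem_Icc, notVis_iff]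
      exact ⟨⟨hi.1, by have := hi.2; omega⟩, hnv⟩
    omega
  · simp only [Finset.mem_filter, Finset.mem_Icc, notVis_iff]
    exact ⟨⟨hi.1, by have := hi.2; omega⟩, hnv⟩

-- the inner 'for y in g[x]' loop
theorem dfsFold_spec {n : Int} (hn : 1 ≤ n) :
    ∀ (ys : List Int) (visited : List Bool) (stack : List Int),
      visited.length = (n + 1).toNat → (∀ z ∈ ys, LabOK n z) →
      ∃ visited' extra,
        ys.foldl dfsPush (visited, stack) = (visited', extra ++ stack) ∧
        visited'.length = (n + 1).toNat ∧
        (∀ z ∈ extra, z ∈ ys) ∧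
        (∀ i, InR (n + 1) i → VisP visited i → VisP visited' i) ∧
        (∀ i, InR (n + 1) i → VisP visited' i →
          VisP visited i ∨ ∃ z ∈ extra, nrmI (n + 1) z = i) ∧
        (∀ z ∈ ys, VisP visited' (nrmI (n + 1) z)) ∧
        (∀ z ∈ extra, ¬ VisP visited (nrmI (n + 1) z)) ∧
        unvis n visited' + extra.length = unvis n visited := by
  intro ys
  induction ys with
  | nil =>
    intro visited stack hlen _
    exact ⟨visited, [], rfl, hlen, by simp, fun _ _ h => h, fun i _ h => Or.inl h,
      by simp, by simp, by simp⟩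
  | cons y ys ih =>
    intro visited stack hlen hys
    have hy : LabOK n y := hys y List.mem_cons_self
    obtain ⟨hy', hyIn⟩ := labOK_nrmI hn hy
    have hread : PySem.List.pyGetD visited y false =
        PySem.List.pyGetD visited (nrmI (n + 1) y) false :=
      pyGetD_lab_wrap visited false hn hlen hy
    have hbnd : 0 ≤ nrmI (n + 1) y ∧ nrmI (n + 1) y < (visited.length : Int) := by
      constructor
      · have := hyIn.1; omega
      · rw [hlen]; have := hyIn.2; omega
    rw [List.foldl_cons]
    by_cases hv : VisP visited (nrmI (n + 1) y)
    · have hstep : dfsPush (visited, stack) y = (visited, stack) := by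
        unfold dfsPush
        simp only
        rw [hread, if_pos (show PySem.List.pyGetD visited (nrmI (n + 1) y) false = true from hv)]
      rw [hstep]
      obtain ⟨visited', extra, heq, h1, h2, h3, h4, h5, h6, h7⟩ :=
        ih visited stack hlen (fun z hz => hys z (List.mem_cons_of_mem y hz))
      refine ⟨visited', extra, heq, h1, fun z hz => List.mem_cons_of_mem y (h2 z hz),
        h3, ?_, ?_, h6, h7⟩
      · intro i hi hvi
        rcases h4 i hi hvi with h | h
        · exact Or.inl h
        · exact Or.inr h
      · intro z hz
        rcases List.mem_cons.mp hz with rfl | hz'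
        · exact h3 _ hyIn hv
        · exact h5 z hz'
    · have hwrite : PySem.List.pySetD visited y true =
          PySem.List.pySetD visited (nrmI (n + 1) y) true :=
        pySetD_lab_wrap visited true hn hlen hy
      have hstep : dfsPush (visited, stack) y =
          (PySem.List.pySetD visited (nrmI (n + 1) y) true, y :: stack) := by
        unfold dfsPush
        simp only
        rw [hread, if_neg (show ¬ PySem.List.pyGetD visited (nrmI (n + 1) y) false = true
          from hv), hwrite]
      rw [hstep]
      have hlen1 : (PySem.List.pySetD visited (nrmI (n + 1) y) true).length = (n + 1).toNat := by
        rw [length_pySetD', hlen]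
      have hvis1 : ∀ i : Int, InR (n + 1) i →
          (VisP (PySem.List.pySetD visited (nrmI (n + 1) y) true) i ↔
            (i = nrmI (n + 1) y ∨ VisP visited i)) := by
        intro i hi
        exact visP_set hbnd.1 (by have := hi.1; omega) (by rw [hlen]; have := hi.2; omega)
      obtain ⟨visited', extra, heq, h1, h2, h3, h4, h5, h6, h7⟩ :=
        ih (PySem.List.pySetD visited (nrmI (n + 1) y) true) (y :: stack) hlen1
          (fun z hz => hys z (List.mem_cons_of_mem y hz))
      refine ⟨visited', extra ++ [y], by rw [heq, List.append_cons], h1, ?_, ?_, ?_, ?_, ?_, ?_⟩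
      · intro z hz
        rcases List.mem_append.mp hz with h | h
        · exact List.mem_cons_of_mem y (h2 z h)
        · rw [List.mem_singleton.mp h]; exact List.mem_cons_self
      · intro i hi hvi
        exact h3 i hi ((hvis1 i hi).mpr (Or.inr hvi))
      · intro i hi hvi
        rcases h4 i hi hvi with h | ⟨z, hz, hnz⟩
        · rcases (hvis1 i hi).mp h with h' | h'
          · exact Or.inr ⟨y, List.mem_append_right _ (List.mem_singleton.mpr rfl), h'.symm⟩
          · exact Or.inl h'
        · exact Or.inr ⟨z, List.mem_append_left _ hz, hnz⟩
      · intro z hz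
        rcases List.mem_cons.mp hz with rfl | hz'
        · exact h3 _ hyIn ((hvis1 _ hyIn).mpr (Or.inl rfl))
        · exact h5 z hz'
      · intro z hz
        rcases List.mem_append.mp hz with h | h
        · intro hvz
          obtain ⟨hz', hzIn⟩ := labOK_nrmI hn (hys z (List.mem_cons_of_mem y (h2 z h)))
          exact h6 z h ((hvis1 _ hzIn).mpr (Or.inr hvz))
        · rw [List.mem_singleton.mp h]
          exact hv
      · rw [List.length_append, List.length_singleton]
        have hdec := unvis_set hn hlen hyIn hv
        omega

theorem erel_of_adj {n : Int} {g : List (List Int)} {P : List (Int × Int)}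
    (hA : AdjInv n g P) {x y : Int} (hx : InR (n + 1) x)
    (h : ∃ z ∈ PySem.List.pyGetD g x [], nrmI (n + 1) z = y) : ERel P x y :=
  (hA.2.2 x y hx).mp h

theorem adj_of_erel {n : Int} {g : List (List Int)} {P : List (Int × Int)}
    (hA : AdjInv n g P) {x y : Int} (hx : InR (n + 1) x) (h : ERel P x y) :
    ∃ z ∈ PySem.List.pyGetD g x [], nrmI (n + 1) z = y :=
  (hA.2.2 x y hx).mpr h

-- the while loop: on exit, the visited set is exactly V0 plus the component of s
theorem dfsLoop_spec {n : Int} (hn : 1 ≤ n) {g : List (List Int)} {P : List (Int × Int)}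
    (hA : AdjInv n g P) (hPok : Pok n P) {V0 : Int → Prop}
    (hV0c : ∀ i j, InR (n + 1) i → InR (n + 1) j → V0 i → ERel P i j → V0 j)
    {s : Int} (hs : InR (n + 1) s) (hsV0 : ¬ V0 s) :
    ∀ (fuel : Nat) (visited : List Bool) (stack : List Int),
      visited.length = (n + 1).toNat →
      (∀ z ∈ stack, LabOK n z ∧ VisP visited (nrmI (n + 1) z) ∧ Conn P s (nrmI (n + 1) z)) →
      (∀ i, InR (n + 1) i → VisP visited i → V0 i ∨ Conn P s i) →
      (∀ i, InR (n + 1) i → V0 i → VisP visited i) →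
      VisP visited s →
      (∀ i, InR (n + 1) i → VisP visited i → ¬ V0 i →
        (∃ z ∈ stack, nrmI (n + 1) z = i) ∨
        (∀ j, InR (n + 1) j → ERel P i j → VisP visited j)) →
      2 * unvis n visited + stack.length < fuel →
      (dfsLoop fuel g visited stack).length = (n + 1).toNat ∧
      (∀ i, InR (n + 1) i →
        (VisP (dfsLoop fuel g visited stack) i ↔ V0 i ∨ Conn P s i)) := by
  intro fuel
  induction fuel with
  | zero =>
    intro visited stack _ _ _ _ _ _ hfuel
    omega
  | succ fuel ih =>
    intro visited stack hlen hstk hsub hsup hVs hfront hfuel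
    match stack with
    | [] =>
      refine ⟨hlen, ?_⟩
      intro i hi
      constructor
      · exact hsub i hi
      · have hconn : ∀ j, Conn P s j → VisP visited j ∧ InR (n + 1) j := by
          intro j hcj
          induction hcj with
          | refl => exact ⟨hVs, hs⟩
          | @tail m z hsm he ihm =>
            obtain ⟨hvm, him⟩ := ihm
            have hz := (erel_inR hPok he).2
            refine ⟨?_, hz⟩
            rcases hsub m him hvm with h0 | _
            · exact hsup z hz (hV0c m z him hz h0 he)
            · rcases hfront m him hvm (fun h0 => hsV0
                (by
                  have hV0conn : ∀ a b, InR (n + 1) a → V0 a → Conn P a b → V0 b := by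
                    intro a b ha h0a hc
                    induction hc with
                    | refl => exact h0a
                    | @tail m' z' _ he' ihm' =>
                      exact hV0c m' z' (erel_inR hPok he').1 (erel_inR hPok he').2 ihm' he'
                  exact hV0conn m s him h0 (conn_symm hsm))) with hw | hcl
              · simp at hw
              · exact hcl z hz he
        intro h
        rcases h with h | h
        · exact hsup i hi h
        · exact (hconn i h).1
    | x :: stack' =>
      obtain ⟨hxLab, hxVis, hxConn⟩ := hstk x List.mem_cons_self
      obtain ⟨hx', hxIn⟩ := labOK_nrmI hn hxLab
      have hglen : g.length = (n + 1).toNat := hA.1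
      have hgx : PySem.List.pyGetD g x [] = PySem.List.pyGetD g (nrmI (n + 1) x) [] :=
        pyGetD_lab_wrap g [] hn hglen hxLab
      have hys : ∀ z ∈ PySem.List.pyGetD g (nrmI (n + 1) x) [], LabOK n z :=
        hA.2.1 _ hxIn
      obtain ⟨visited', extra, heq, h1, h2, h3, h4, h5, h6, h7⟩ :=
        dfsFold_spec hn (PySem.List.pyGetD g (nrmI (n + 1) x) []) visited stack' hlen hys
      have hnew_conn : ∀ i, InR (n + 1) i → (∃ z ∈ extra, nrmI (n + 1) z = i) →
          Conn P s i := by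
        intro i hi ⟨z, hz, hnz⟩
        have herel : ERel P (nrmI (n + 1) x) i :=
          erel_of_adj hA hxIn ⟨z, h2 z hz, hnz⟩
        exact hxConn.tail herel
      have hstep : dfsLoop (fuel + 1) g visited (x :: stack') =
          dfsLoop fuel g visited' (extra ++ stack') := by
        show dfsLoop fuel g ((PySem.List.pyGetD g x []).foldl dfsPush (visited, stack')).1
          ((PySem.List.pyGetD g x []).foldl dfsPush (visited, stack')).2 = _
        rw [hgx, heq]
      rw [hstep]
      apply ih visited' (extra ++ stack') h1
      · intro z hz
        rcases List.mem_append.mp hz with h | h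
        · have hzLab := hys z (h2 z h)
          obtain ⟨_, hzIn⟩ := labOK_nrmI hn hzLab
          exact ⟨hzLab, h5 z (h2 z h),
            hnew_conn _ hzIn ⟨z, h, rfl⟩⟩
        · obtain ⟨hzL, hzV, hzC⟩ := hstk z (List.mem_cons_of_mem x h)
          obtain ⟨_, hzIn⟩ := labOK_nrmI hn hzL
          exact ⟨hzL, h3 _ hzIn hzV, hzC⟩
      · intro i hi hvi
        rcases h4 i hi hvi with h | h
        · exact hsub i hi h
        · exact Or.inr (hnew_conn i hi h)
      · intro i hi h0
        exact h3 i hi (hsup i hi h0)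
      · exact h3 s hs hVs
      · intro i hi hvi hni
        by_cases hix : i = nrmI (n + 1) x
        · right
          intro j hj hej
          obtain ⟨z, hz, hnz⟩ := adj_of_erel hA hxIn (hix ▸ hej)
          exact hnz ▸ h5 z hz
        · rcases h4 i hi hvi with hold | hnew
          · rcases hfront i hi hold hni with ⟨z, hz, hnz⟩ | hcl
            · rcases List.mem_cons.mp hz with rfl | hz'
              · exact absurd hnz.symm hix
              · exact Or.inl ⟨z, List.mem_append_right _ hz', hnz⟩
            · right
              intro j hj hej
              exact h3 j hj (hcl j hj hej)
          · obtain ⟨z, hz, hnz⟩ := hnew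
            exact Or.inl ⟨z, List.mem_append_left _ hz, hnz⟩
      · rw [List.length_append]
        have := List.length_cons (a := x) (as := stack')
        omega

-- visited sets closed under edges are closed under connectivity
theorem vis_conn_closed {n : Int} {P : List (Int × Int)} (hPok : Pok n P)
    {visited : List Bool}
    (hcl : ∀ i j, InR (n + 1) i → InR (n + 1) j → VisP visited i → ERel P i j →
      VisP visited j) :
    ∀ {i j : Int}, InR (n + 1) i → VisP visited i → Conn P i j → VisP visited j := by
  intro i j hi hvi hc
  have : VisP visited j ∧ InR (n + 1) j := by
    induction hc with
    | refl => exact ⟨hvi, hi⟩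
    | @tail m z hsm he ihm =>
      obtain ⟨hvm, him⟩ := ihm
      have hz := (erel_inR hPok he).2
      exact ⟨hcl m z him hz hvm he, hz⟩
  exact this.1

theorem image_eq_rootsOf {n : Int} (hn : 1 ≤ n) {ρ : Int → Int}
    (hcl : ∀ i, InR (n + 1) i → InR (n + 1) (ρ i) ∧ ρ (ρ i) = ρ i) :
    (Finset.Icc (1 : Int) n).image ρ = rootsOf n ρ := by
  ext r
  simp only [Finset.mem_image, rootsOf, Finset.mem_filter, Finset.mem_Icc]
  constructor
  · rintro ⟨i, hi, rfl⟩
    have hiIn : InR (n + 1) i := ⟨hi.1, by omega⟩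
    obtain ⟨hrIn, hidem⟩ := hcl i hiIn
    exact ⟨⟨hrIn.1, by have := hrIn.2; omega⟩, hidem⟩
  · rintro ⟨hr, hroot⟩
    exact ⟨r, hr, hroot⟩

theorem compLoop_go {n : Int} (hn : 1 ≤ n) {g : List (List Int)} {P : List (Int × Int)}
    {ρ : Int → Int} (hA : AdjInv n g P) (hPok : Pok n P) (hpc : PC n ρ P) :
    ∀ (k : Nat) (s0 : Int) (visited : List Bool) (c : Int),
      (n + 1 - s0).toNat = k → 1 ≤ s0 → s0 ≤ n + 1 →
      visited.length = (n + 1).toNat →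
      (∀ i, InR (n + 1) i → i < s0 → VisP visited i) →
      (∀ i j, InR (n + 1) i → InR (n + 1) j → VisP visited i → ERel P i j →
        VisP visited j) →
      (∀ i, InR (n + 1) i → VisP visited i → ∃ j, InR (n + 1) j ∧ j < s0 ∧ Conn P j i) →
      c = (((Finset.Icc (1 : Int) (s0 - 1)).image ρ).card : Int) →
      ((PySem.List.pyRange s0 (n + 1) 1).foldl (compStep g) (visited, c)).2 =
        (((Finset.Icc (1 : Int) n).image ρ).card : Int) := by
  intro k
  induction k with
  | zero =>
    intro s0 visited c hk h1 h2 hlen _ _ _ hc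
    have hs0 : s0 = n + 1 := by omega
    rw [PySem.List.pyRange_one_eq_nil (by omega)]
    simp only [List.foldl_nil]
    rw [hc, hs0]
    norm_num
  | succ k ih =>
    intro s0 visited c hk h1 h2 hlen hA' hB hC hc
    have hs0n : s0 ≤ n := by omega
    have hs0In : InR (n + 1) s0 := ⟨h1, by omega⟩
    rw [PySem.List.pyRange_one_cons (by omega), List.foldl_cons]
    have hicc : Finset.Icc (1 : Int) s0 = insert s0 (Finset.Icc (1 : Int) (s0 - 1)) := by
      ext j
      simp only [Finset.mem_insert, Finset.mem_Icc]
      omega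
    by_cases hv : VisP visited s0
    · have hstep : compStep g (visited, c) s0 = (visited, c) := by
        unfold compStep
        simp only
        rw [if_pos (show PySem.List.pyGetD visited s0 false = true from hv)]
      rw [hstep]
      apply ih (s0 + 1) visited c (by omega) (by omega) (by omega) hlen
      · intro i hi hlt
        by_cases h : i = s0
        · exact h ▸ hv
        · exact hA' i hi (by omega)
      · exact hB
      · intro i hi hvi
        obtain ⟨j, hj, hjl, hjc⟩ := hC i hi hvi
        exact ⟨j, hj, by omega, hjc⟩
      · obtain ⟨j, hj, hjl, hjc⟩ := hC s0 hs0In hv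
        have hmem : ρ s0 ∈ (Finset.Icc (1 : Int) (s0 - 1)).image ρ := by
          apply Finset.mem_image.mpr
          refine ⟨j, ?_, ?_⟩
          · simp only [Finset.mem_Icc]
            exact ⟨hj.1, by omega⟩
          · exact (hpc j s0 hj hs0In).mpr hjc
        rw [hc]
        congr 1
        rw [show s0 + 1 - 1 = s0 by omega, hicc, Finset.image_insert,
          Finset.insert_eq_self.mpr hmem]
    · have hnotmem : ρ s0 ∉ (Finset.Icc (1 : Int) (s0 - 1)).image ρ := by
        intro hmem
        obtain ⟨j, hj, hje⟩ := Finset.mem_image.mp hmem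
        simp only [Finset.mem_Icc] at hj
        have hjIn : InR (n + 1) j := ⟨hj.1, by omega⟩
        have hconn : Conn P j s0 := (hpc j s0 hjIn hs0In).mp hje
        have hvj : VisP visited j := hA' j hjIn (by omega)
        exact hv (vis_conn_closed hPok hB hjIn hvj hconn)
      have hlen1 : (PySem.List.pySetD visited s0 true).length = (n + 1).toNat := by
        rw [length_pySetD', hlen]
      have hvis1 : ∀ i : Int, InR (n + 1) i →
          (VisP (PySem.List.pySetD visited s0 true) i ↔ (i = s0 ∨ VisP visited i)) := by
        intro i hi
        exact visP_set (by omega) (by have := hi.1; omega)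
          (by rw [hlen]; have := hi.2; omega)
      obtain ⟨hlen', hchar⟩ := dfsLoop_spec hn hA hPok
        (V0 := fun i => VisP visited i) hB hs0In hv
        (2 * visited.length + 1) (PySem.List.pySetD visited s0 true) [s0] hlen1
        (by
          intro z hz
          rw [List.mem_singleton.mp hz]
          refine ⟨Or.inl ⟨h1, hs0n⟩, ?_, ?_⟩
          · rw [nrmI_self (by omega)]
            exact (hvis1 s0 hs0In).mpr (Or.inl rfl)
          · rw [nrmI_self (by omega)]
            exact Relation.ReflTransGen.refl)
        (by
          intro i hi hvi
          rcases (hvis1 i hi).mp hvi with h | h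
          · exact Or.inr (h ▸ Relation.ReflTransGen.refl)
          · exact Or.inl h)
        (by
          intro i hi h0
          exact (hvis1 i hi).mpr (Or.inr h0))
        ((hvis1 s0 hs0In).mpr (Or.inl rfl))
        (by
          intro i hi hvi hni
          rcases (hvis1 i hi).mp hvi with h | h
          · exact Or.inl ⟨s0, List.mem_singleton.mpr rfl, by rw [nrmI_self (by omega)]; omega⟩
          · exact absurd h hni)
        (by
          have hu1 := unvis_le (n := n) (PySem.List.pySetD visited s0 true)
          have hlp : visited.length = (n + 1).toNat := hlen
          simp only [List.length_singleton]
          omega)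
      have hstep : compStep g (visited, c) s0 =
          (dfsLoop (2 * visited.length + 1) g (PySem.List.pySetD visited s0 true) [s0],
            c + 1) := by
        unfold compStep
        simp only
        rw [if_neg (show ¬ PySem.List.pyGetD visited s0 false = true from hv)]
      rw [hstep]
      apply ih (s0 + 1) _ (c + 1) (by omega) (by omega) (by omega) hlen'
      · intro i hi hlt
        apply (hchar i hi).mpr
        by_cases h : i = s0
        · exact Or.inr (h ▸ Relation.ReflTransGen.refl)
        · exact Or.inl (hA' i hi (by omega))
      · intro i j hi hj hvi he
        apply (hchar j hj).mpr
        rcases (hchar i hi).mp hvi with h | h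
        · exact Or.inl (hB i j hi hj h he)
        · exact Or.inr (h.tail he)
      · intro i hi hvi
        rcases (hchar i hi).mp hvi with h | h
        · obtain ⟨j, hj, hjl, hjc⟩ := hC i hi h
          exact ⟨j, hj, by omega, hjc⟩
        · exact ⟨s0, hs0In, by omega, h⟩
      · rw [hc]
        rw [show s0 + 1 - 1 = s0 by omega, hicc, Finset.image_insert,
          Finset.card_insert_of_notMem hnotmem]
        push_cast
        ring

theorem componentsB_eq {n : Int} (hn : 1 ≤ n) {g : List (List Int)} {P : List (Int × Int)}
    {ρ : Int → Int} (hA : AdjInv n g P) (hPok : Pok n P) (hpc : PC n ρ P)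
    (hcl : ∀ i, InR (n + 1) i → InR (n + 1) (ρ i) ∧ ρ (ρ i) = ρ i) :
    componentsB n g = ((rootsOf n ρ).card : Int) := by
  unfold componentsB
  rw [← image_eq_rootsOf hn hcl]
  apply compLoop_go hn hA hPok hpc (n + 1 - 1).toNat 1 _ 0 rfl (by omega) (by omega)
    List.length_replicate
  · intro i hi hlt
    have := hi.1
    omega
  · intro i j hi hj hvi _
    exfalso
    unfold VisP at hvi
    rw [pyGetD_replicate _ _ _ i (by have := hi.1; omega) (by have := hi.2; omega)] at hvi
    simp at hvi
  · intro i hi hvi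
    exfalso
    unfold VisP at hvi
    rw [pyGetD_replicate _ _ _ i (by have := hi.1; omega) (by have := hi.2; omega)] at hvi
    simp at hvi
  · rw [show (1 : Int) - 1 = 0 by omega, Finset.Icc_eq_empty (by omega)]
    simp

theorem pc_id_nil (n : Int) : PC n (fun i => i) [] := by
  intro x y _ _
  exact conn_nil.symm

-- ===== VERDICT (by name: the statement is the Claim_ definition above) =====
theorem max_num_edges_to_remove_2_spec : Claim_equal_max_num_edges_to_remove_2 := by
  intro n edges _ hpre
  obtain ⟨hn, hall'⟩ := hpre
  unfold Spec_max_num_edges_to_remove_2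
  have hall : ∀ e ∈ edges, pvEdgeOK n e = true := by
    simpa [List.all_eq_true] using hall'
  -- phase 1 of A, against the type-3 pair list
  have hg1init : Good1 n (PySem.List.pyRange 0 (n + 1) 1, List.replicate (n + 1).toNat 1,
      PySem.List.pyRange 0 (n + 1) 1, List.replicate (n + 1).toNat 1, 0) [] := by
    refine ⟨fun i => i, fun i => i, init_dsu hn, init_dsu hn, pc_id_nil n, pc_id_nil n,
      rfl, ?_⟩
    simp only [rootsOf_id]
    omega
  have hG1 := good1_fold hn edges _ [] hall hg1init
  rw [List.nil_append] at hG1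
  simp only [max_num_edges_to_remove_2, max_num_edges_to_remove_2_alt]
  generalize hfa1 : edges.foldl step1A (PySem.List.pyRange 0 (n + 1) 1,
    List.replicate (n + 1).toNat 1, PySem.List.pyRange 0 (n + 1) 1,
    List.replicate (n + 1).toNat 1, 0) = s1 at hG1 ⊢
  obtain ⟨ρ31, ρ32, hd31, hd32, hpc31, hpc32, hcc3, hreq3⟩ := hG1
  -- phase 2 of A
  have hg2init : Good2 n (rootsOf n ρ31).card (allPairs n [3] edges) s1 [] [] := by
    refine ⟨ρ31, ρ32, hd31, hd32, ?_, ?_, le_refl _, le_of_eq hcc3.symm, ?_⟩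
    · rw [List.append_nil]; exact hpc31
    · rw [List.append_nil]; exact hpc32
    · rw [hreq3, hcc3]
      omega
  have hG2 := good2_fold hn edges s1 [] [] hall hg2init
  rw [List.nil_append, List.nil_append] at hG2
  generalize hfa2 : edges.foldl step2A s1 = s2 at hG2 ⊢
  obtain ⟨uf1, rank1', uf2, rank2', req⟩ := s2
  obtain ⟨ρ1, ρ2, hd1, hd2, hpc1, hpc2, hk1, hk2, hreq⟩ := hG2
  simp only at hd1 hd2 hpc1 hpc2 hk1 hk2 hreq
  -- B's adjacency lists
  have hbuild := adjInv_build_fold hn edges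
    (List.replicate (n + 1).toNat [], List.replicate (n + 1).toNat [],
     List.replicate (n + 1).toNat []) [] [] [] hall (adjInv_init hn) (adjInv_init hn)
    (adjInv_init hn)
  rw [List.nil_append, List.nil_append, List.nil_append] at hbuild
  generalize hfb : edges.foldl buildB (List.replicate (n + 1).toNat [],
    List.replicate (n + 1).toNat [], List.replicate (n + 1).toNat []) = gs at hbuild ⊢
  obtain ⟨g1, g2, g3⟩ := gs
  obtain ⟨hA1, hA2, hA3⟩ := hbuild
  simp only at hA1 hA2 hA3
  -- component counts of B are the class counts of A's final union-find maps
  have hts31 : ∀ t ∈ ([3, 1] : List Int), t = 1 ∨ t = 2 ∨ t = 3 := by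
    intro t ht; rcases List.mem_cons.mp ht with h | h
    · exact Or.inr (Or.inr h)
    · simp at h; exact Or.inl h
  have hts32 : ∀ t ∈ ([3, 2] : List Int), t = 1 ∨ t = 2 ∨ t = 3 := by
    intro t ht; rcases List.mem_cons.mp ht with h | h
    · exact Or.inr (Or.inr h)
    · simp at h; exact Or.inr (Or.inl h)
  have hts3 : ∀ t ∈ ([3] : List Int), t = 1 ∨ t = 2 ∨ t = 3 := by
    intro t ht; simp at ht; exact Or.inr (Or.inr ht)
  have hcl1 := dsu_closure hn hd1
  have hcl2 := dsu_closure hn hd2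
  have hcl3 := dsu_closure hn hd31
  have hpc1' : PC n ρ1 (allPairs n [3, 1] edges) :=
    pc_congr (mem_allPairs_union (by norm_num) edges) hpc1
  have hpc2' : PC n ρ2 (allPairs n [3, 2] edges) :=
    pc_congr (mem_allPairs_union (by norm_num) edges) hpc2
  have hc1B : componentsB n g1 = (((rootsOf n ρ1).card : Nat) : Int) :=
    componentsB_eq hn hA1 (pok_allPairs hn hts31 hall) hpc1' hcl1
  have hc2B : componentsB n g2 = (((rootsOf n ρ2).card : Nat) : Int) :=
    componentsB_eq hn hA2 (pok_allPairs hn hts32 hall) hpc2' hcl2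
  have hc3B : componentsB n g3 = (((rootsOf n ρ31).card : Nat) : Int) :=
    componentsB_eq hn hA3 (pok_allPairs hn hts3 hall) hpc31 hcl3
  have hc1pos := roots_nonempty hn hcl1
  have hc2pos := roots_nonempty hn hcl2
  have hc3pos := roots_nonempty hn hcl3
  simp only [hc1B, hc2B, hc3B]
  have h1in : InR (n + 1) 1 := ⟨le_refl 1, by omega⟩
  have hmemis : ∀ i ∈ PySem.List.pyRange 1 (n + 1) 1, InR (n + 1) i := by
    intro i hi
    rw [PySem.List.mem_pyRange_one] at hi
    exact ⟨hi.1, hi.2⟩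
  by_cases hcon : 1 < (rootsOf n ρ1).card ∨ 1 < (rootsOf n ρ2).card
  · rw [if_pos (show ((rootsOf n ρ1).card : Int) > 1 ∨ ((rootsOf n ρ2).card : Int) > 1
      by omega)]
    by_cases hreqlt : req < n - 1
    · rw [if_pos hreqlt]
    · rw [if_neg hreqlt]
      rcases hcon with hcon | hcon
      · obtain ⟨i, hiin, hine⟩ := exists_disconn_of_one_lt_card hn hcon
        exact verifyA_fail hn _ uf1 uf2 hd1 hd2 hmemis
          ⟨i, by rw [PySem.List.mem_pyRange_one]; exact ⟨hiin.1, hiin.2⟩, Or.inl hine⟩ _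
      · obtain ⟨i, hiin, hine⟩ := exists_disconn_of_one_lt_card hn hcon
        exact verifyA_fail hn _ uf1 uf2 hd1 hd2 hmemis
          ⟨i, by rw [PySem.List.mem_pyRange_one]; exact ⟨hiin.1, hiin.2⟩, Or.inr hine⟩ _
  · rw [if_neg (show ¬(((rootsOf n ρ1).card : Int) > 1 ∨ ((rootsOf n ρ2).card : Int) > 1)
      by omega)]
    have hc1 : (rootsOf n ρ1).card = 1 := by omega
    have hc2 : (rootsOf n ρ2).card = 1 := by omega
    have hconn : ∀ i ∈ PySem.List.pyRange 1 (n + 1) 1, ρ1 i = ρ1 1 ∧ ρ2 i = ρ2 1 := by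
      intro i hi
      have hiin := hmemis i hi
      exact ⟨allconn_of_card_le_one hn hcl1 (by omega) i hiin,
        allconn_of_card_le_one hn hcl2 (by omega) i hiin⟩
    rw [if_neg (show ¬req < n - 1 by rw [hreq]; omega)]
    rw [verifyA_pass hn _ uf1 uf2 hd1 hd2 hmemis hconn _, hreq]
    omega
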